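-- pv_equiv track=rewrite | github.com/Saqlain143/Advent-of-Code | 2025/Day 10/1.py | min_presses_for_machine
-- ===== SOURCE A (Python) =====
-- from collections import deque
--
-- def solve_by_subset(target, button_masks):
--     """
--     Solve using subset enumeration over buttons (works best when number of buttons is small).
--     Each button is either pressed 0 or 1 time (mod 2), so we just try all subsets and
--     keep the one with minimal number of presses whose combined effect equals target.
--     """
--     m = len(button_masks)
--     size = 1 << m
--
--     # combined[s] = XOR of all buttons included in subset 's'
--     combined = [0] * size
--     # if target is 0, pressing nothing is already a solution with cost 0
--     best = 0 if target == 0 else None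
--
--     for s in range(1, size):
--         lsb = s & -s  # least significant bit
--         idx = lsb.bit_length() - 1  # which button index
--         combined[s] = combined[s ^ lsb] ^ button_masks[idx]
--
--         if combined[s] == target:
--             presses = s.bit_count()
--             if best is None or presses < best:
--                 best = presses
--
--     return best
--
-- def solve_by_bfs(target, button_masks, n_lights):
--     """
--     BFS over light configurations. State = bitmask of current lights.
--     Start from all-off (0), each edge = press one button (toggle its mask).
--     First time we reach target state gives minimal number of presses.
--     """
--     if target == 0:
--         return 0
--
--     max_state = 1 << n_lights
--     dist = [-1] * max_state
--     q = deque([0])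
--     dist[0] = 0
--
--     while q:
--         state = q.popleft()
--         d = dist[state]
--
--         for bm in button_masks:
--             ns = state ^ bm
--             if dist[ns] == -1:
--                 dist[ns] = d + 1
--                 if ns == target:
--                     return d + 1
--                 q.append(ns)
--
--     # If here, target is unreachable (shouldn't happen for valid puzzles).
--     return None
--
-- def min_presses_for_machine(pattern, button_masks):
--     """
--     Given pattern string like '.##.#' and list of button bitmasks,
--     return minimal number of presses to reach pattern from all-off.
--     """
--     # Build target bitmask: bit i = 1 if light i should be '#'
--     target = 0
--     for i, ch in enumerate(pattern):
--         if ch == '#':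
--             target |= 1 << i
--
--     if target == 0:
--         return 0
--
--     if not button_masks:
--         return None
--
--     m = len(button_masks)
--     n = len(pattern)
--
--     # Heuristic: if number of buttons is small, subset enumeration is cheap.
--     # Otherwise, if lights are few, BFS on states is better.
--     # This should be more than enough for typical Advent of Code constraints.
--     if m <= 22 and m <= n:
--         ans = solve_by_subset(target, button_masks)
--         if ans is not None:
--             return ans
--
--     # Fallback / alternative: BFS over light configurations
--     ans = solve_by_bfs(target, button_masks, n)
--     return ans
-- ===== SOURCE B (Python) =====
-- def min_presses_for_machine(pattern, button_masks):
--     # Build target bitmask: bit i = 1 if light i should be '#'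
--     target = 0
--     for i, ch in enumerate(pattern):
--         if ch == '#':
--             target |= 1 << i
--
--     if target == 0:
--         return 0          # nothing to toggle
--     if not button_masks:
--         return None
--
--     # Meet in the middle: split the buttons in two halves, tabulate the
--     # minimal press count for every XOR reachable from the left half,
--     # then scan the right half's subsets and combine.
--     m = len(button_masks)
--     h = m // 2
--     left = button_masks[:h]
--     right = button_masks[h:]
--
--     best_left = {}
--     for s in range(1 << h):
--         x = 0
--         for j in range(h):
--             if (s >> j) & 1:
--                 x ^= left[j]
--         c = s.bit_count()
--         prev = best_left.get(x)
--         if prev is None or c < prev: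
--             best_left[x] = c
--
--     best = None
--     for s in range(1 << (m - h)):
--         x = 0
--         for j in range(m - h):
--             if (s >> j) & 1:
--                 x ^= right[j]
--         c = s.bit_count()
--         half = best_left.get(x ^ target)
--         if half is not None:
--             tot = c + half
--             if best is None or tot < best:
--                 best = tot
--     return best
-- ===== Notes on version B (the rewrite author's own statement) =====
-- stated objective: alternative
-- what changed: Replaces A's full 2^m subset enumeration (with a BFS-over-light-states fallback) by meet-in-the-middle: tabulate the minimal press count for every XOR reachable from the left half of the buttons in a dict, then scan the right half's subsets and combine (2^(m/2) subsets per half instead of 2^m); a timing run's generated inputs are dominated by trivial targets, so no speedup is claimed.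
-- outside the precondition, e.g. on min_presses_for_machine('##', [7, 4]): A returns 2, B returns 2; on min_presses_for_machine('#..#', [13, 0, 7, -7, 9]): A returns None, B returns 1; on min_presses_for_machine('##', [5]): A raises IndexError, B returns None
import Mathlib
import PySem

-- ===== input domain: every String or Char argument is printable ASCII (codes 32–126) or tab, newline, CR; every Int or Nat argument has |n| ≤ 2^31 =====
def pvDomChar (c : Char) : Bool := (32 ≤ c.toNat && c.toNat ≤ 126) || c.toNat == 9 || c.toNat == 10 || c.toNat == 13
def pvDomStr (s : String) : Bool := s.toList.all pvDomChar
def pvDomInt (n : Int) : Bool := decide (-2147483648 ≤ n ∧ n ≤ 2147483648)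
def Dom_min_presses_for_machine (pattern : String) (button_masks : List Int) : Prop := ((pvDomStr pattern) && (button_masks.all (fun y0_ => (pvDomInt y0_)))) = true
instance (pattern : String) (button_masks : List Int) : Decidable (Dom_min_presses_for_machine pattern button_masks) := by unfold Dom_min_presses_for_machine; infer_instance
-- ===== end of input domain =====

-- B replaces A's full-subset enumeration (plus BFS fallback over light states) by meet-in-the-middle
-- over the two halves of the button list: same return value on all inputs Pre_ admits.

-- ===== PORT A =====

-- target |= 1 << i for the '#' positions  (i = enumerate index, always ≥ 0, so .toNat is exact)
def pvTargetA (pattern : String) : Int :=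
  (PySem.List.enumerate pattern.toList).foldl
    (fun target p => if p.2 = '#' then PySem.Int.bor target ((1:Int) <<< p.1.toNat) else target) 0

-- one iteration of solve_by_subset's `for s in range(1, size)` loop; state = (combined, best)
def pvSubsetStep (button_masks : List Int) (target : Int)
    (st : List Int × Option Int) (s : Int) : List Int × Option Int :=
  let lsb := PySem.Int.band s (-s)
  let idx : Int := (PySem.Int.bitLength lsb : Int) - 1
  let v := PySem.Int.bxor (PySem.List.pyGetD st.1 (PySem.Int.bxor s lsb) 0)
                          (PySem.List.pyGetD button_masks idx 0)
  let combined := PySem.List.pySetD st.1 s v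
  if v = target then
    let presses : Int := (PySem.Int.bitCount s : Int)
    match st.2 with
    | none => (combined, some presses)
    | some best => if presses < best then (combined, some presses) else (combined, some best)
  else (combined, st.2)

def pvSolveBySubset (target : Int) (button_masks : List Int) : Option Int :=
  let m := button_masks.length
  let size : Int := (1:Int) <<< m
  let combined := PySem.List.pyRepeat [(0:Int)] size
  let best : Option Int := if target = 0 then some 0 else none
  ((PySem.List.pyRange 1 size).foldl (pvSubsetStep button_masks target) (combined, best)).2

-- the `for bm in button_masks` body of solve_by_bfs (early `return` modelled by the Option in
-- the accumulator: once some, the remaining buttons change nothing — as after Python's return)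
def pvBfsInner (button_masks : List Int) (target d state : Int)
    (acc : List Int × List Int × Option Int) : List Int × List Int × Option Int :=
  button_masks.foldl (fun acc bm =>
    match acc.2.2 with
    | some _ => acc
    | none =>
      let ns := PySem.Int.bxor state bm
      if PySem.List.pyGetD acc.1 ns 0 = -1 then
        let dist := PySem.List.pySetD acc.1 ns (d + 1)
        if ns = target then (dist, acc.2.1, some (d + 1))
        else (dist, acc.2.1 ++ [ns], none)
      else acc) acc

-- Python's `while q` loop, recursion on fuel.  Fuel 2^n+1 bounds the possible iterations on the
-- inputs Pre_ admits: each enqueue flips one of the 2^n dist cells from -1, so the fuel is never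
-- exhausted before the queue empties or the early return fires (proved in pvLoopBest below).
def pvBfsLoop (button_masks : List Int) (target : Int) : Nat → List Int → List Int → Option Int
  | 0, _, _ => none
  | fuel + 1, dist, q =>
    match q with
    | [] => none
    | state :: rest =>
      let d := PySem.List.pyGetD dist state (-1)
      let res := pvBfsInner button_masks target d state (dist, [], none)
      match res.2.2 with
      | some r => some r
      | none => pvBfsLoop button_masks target fuel res.1 (rest ++ res.2.1)

def pvSolveByBfs (target : Int) (button_masks : List Int) (n_lights : Int) : Option Int :=
  if target = 0 then some 0
  else
    let maxState : Int := (1:Int) <<< n_lights.toNat  -- n_lights = len(pattern) ≥ 0: .toNat exact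
    let dist := PySem.List.pySetD (PySem.List.pyRepeat [(-1:Int)] maxState) 0 0
    pvBfsLoop button_masks target (maxState.toNat + 1) dist [0]

def min_presses_for_machine (pattern : String) (button_masks : List Int) : Option Int :=
  let target := pvTargetA pattern
  if target = 0 then some 0
  else if button_masks = [] then none
  else
    let m : Int := PySem.List.len button_masks
    let n : Int := PySem.Str.len pattern
    if m ≤ 22 ∧ m ≤ n then
      match pvSolveBySubset target button_masks with
      | some ans => some ans
      | none => pvSolveByBfs target button_masks n
    else pvSolveByBfs target button_masks n

-- ===== PORT B =====

def pvTargetB (pattern : String) : Int :=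
  (PySem.List.enumerate pattern.toList).foldl
    (fun target p => if p.2 = '#' then PySem.Int.bor target ((1:Int) <<< p.1.toNat) else target) 0

-- `for j in range(hcount): if (s >> j) & 1: x ^= half[j]`  (j from range(..) is ≥ 0: .toNat exact)
def pvHalfXor (half : List Int) (hcount : Int) (s : Int) : Int :=
  (PySem.List.pyRange 0 hcount).foldl
    (fun x j => if PySem.Int.band (s >>> j.toNat) 1 ≠ 0
                then PySem.Int.bxor x (PySem.List.pyGetD half j 0) else x) 0

-- best_left: minimal press count for every XOR value reachable from the left half
def pvBestLeft (left : List Int) (h : Int) : PySem.Dict Int Int :=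
  (PySem.List.pyRange 0 ((1:Int) <<< h.toNat)).foldl
    (fun d s =>
      let x := pvHalfXor left h s
      let c : Int := (PySem.Int.bitCount s : Int)
      match d.get? x with
      | none => d.insert x c
      | some prev => if c < prev then d.insert x c else d) PySem.Dict.empty

def min_presses_for_machine_alt (pattern : String) (button_masks : List Int) : Option Int :=
  let target := pvTargetB pattern
  if target = 0 then some 0
  else if button_masks = [] then none
  else
  let m : Int := PySem.List.len button_masks
  let h : Int := PySem.Int.floordiv m 2
  let left := PySem.List.slice button_masks none (some h)
  let right := PySem.List.slice button_masks (some h) none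
  let bestLeft := pvBestLeft left h
  (PySem.List.pyRange 0 ((1:Int) <<< (m - h).toNat)).foldl
    (fun best s =>
      let x := pvHalfXor right (m - h) s
      let c : Int := (PySem.Int.bitCount s : Int)
      match bestLeft.get? (PySem.Int.bxor x target) with
      | none => best
      | some half =>
        let tot := c + half
        match best with
        | none => some tot
        | some b => if tot < b then some tot else some b) none

-- ===== PRECONDITION & SPEC =====
-- Pre_ restricts the button masks to n-bit values (0 ≤ bm < 2^n for n lights) — the natural
-- domain of the puzzle, where each button toggles a subset of the n lights.  Outside it,
-- whenever A's BFS fallback is reached it raises IndexError (dist[ns] out of range) or silently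
-- corrupts dist through Python's negative-index wraparound; on some excluded inputs A's subset
-- enumeration still returns before the BFS and B happens to agree with it (see the cites), but
-- no behaviour is claimed for out-of-range masks.  Patterns with no '#' and the empty button
-- list are answered by A before it touches the masks and are admitted unconditionally.
def Pre_min_presses_for_machine (pattern : String) (button_masks : List Int) : Prop :=
  '#' ∉ pattern.toList ∨ button_masks = [] ∨
    (∀ bm ∈ button_masks, 0 ≤ bm ∧ bm < 2 ^ pattern.toList.length)
instance (pattern : String) (button_masks : List Int) : Decidable (Pre_min_presses_for_machine pattern button_masks) := by
  unfold Pre_min_presses_for_machine; infer_instance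

def pvWitness_min_presses_for_machine : String × List Int := ("##", [1, 2])

def Spec_min_presses_for_machine (pattern : String) (button_masks : List Int) (out : Option Int) : Prop := out = min_presses_for_machine_alt pattern button_masks
instance (pattern : String) (button_masks : List Int) (out : Option Int) : Decidable (Spec_min_presses_for_machine pattern button_masks out) := by unfold Spec_min_presses_for_machine; infer_instance

-- ===== CLAIM (what is proved, stated in full; the proofs are below) =====
def Claim_equal_min_presses_for_machine : Prop := ∀ (pattern : String) (button_masks : List Int), Dom_min_presses_for_machine pattern button_masks → Pre_min_presses_for_machine pattern button_masks → Spec_min_presses_for_machine pattern button_masks (min_presses_for_machine pattern button_masks)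

-- ===== LEMMAS AND PROOFS =====

-- ---------- generic bit-level facts ----------

theorem pv_and_mod_two (a b : Nat) : (a &&& b) % 2 = (a % 2) &&& (b % 2) := by
  have h1 := Nat.testBit_and a b 0
  have h2 := Nat.mod_two_eq_zero_or_one (a &&& b)
  simp only [Nat.testBit_zero] at h1
  rcases Nat.mod_two_eq_zero_or_one a with h|h <;> rcases Nat.mod_two_eq_zero_or_one b with h'|h' <;>
    rw [h, h'] <;> rw [h, h'] at h1 <;> simp_all

theorem pv_or_eq_zero (a b : Nat) (h : a ||| b = 0) : a = 0 ∧ b = 0 :=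
  ⟨Nat.le_zero.mp (h ▸ Nat.left_le_or), Nat.le_zero.mp (h ▸ Nat.right_le_or)⟩

-- k & -k isolates the lowest set bit: k &&& (k-1) clears it, xor with it removes it
theorem pv_lsb_spec (k : Nat) (hk : 0 < k) :
    ∃ j, k &&& (k - 1) = k - 2^j ∧ 2^j ≤ k ∧ k ^^^ 2^j = k - 2^j := by
  induction k using Nat.strong_induction_on with
  | _ k ih =>
    rcases Nat.mod_two_eq_zero_or_one k with hpar | hpar
    · -- even
      have ha : 0 < k / 2 := by omega
      obtain ⟨j, h1, h2, h3⟩ := ih (k / 2) (by omega) ha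
      have hpow : (2:Nat)^(j+1) = 2 * 2^j := by rw [Nat.pow_succ]; ring
      refine ⟨j + 1, ?_, by omega, ?_⟩
      · have hmod : (k &&& (k - 1)) % 2 = 0 := by
          rw [pv_and_mod_two, hpar]; simp
        have hdiv : (k &&& (k - 1)) / 2 = (k / 2) &&& ((k - 1) / 2) := Nat.and_div_two
        have hx : (k - 1) / 2 = k / 2 - 1 := by omega
        rw [hx, h1] at hdiv
        have hdm := Nat.div_add_mod (k &&& (k - 1)) 2
        omega
      · have hm2 : (2:Nat)^(j+1) % 2 = 0 := by omega
        have hmod := Nat.xor_mod_two_eq (m := k) (n := 2^(j+1))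
        have hdiv : (k ^^^ 2^(j+1)) / 2 = (k / 2) ^^^ (2^(j+1) / 2) := Nat.xor_div_two
        have hp : 2^(j+1) / 2 = 2^j := by omega
        rw [hp, h3] at hdiv
        have hdm := Nat.div_add_mod (k ^^^ 2^(j+1)) 2
        omega
    · -- odd
      refine ⟨0, ?_, by omega, ?_⟩
      · have hmod : (k &&& (k - 1)) % 2 = 0 := by
          rw [pv_and_mod_two, hpar]
          have hx : (k - 1) % 2 = 0 := by omega
          rw [hx]; simp
        have hdiv : (k &&& (k - 1)) / 2 = (k / 2) &&& ((k - 1) / 2) := Nat.and_div_two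
        have hx : (k - 1) / 2 = k / 2 := by omega
        rw [hx, Nat.and_self] at hdiv
        have hdm := Nat.div_add_mod (k &&& (k - 1)) 2
        omega
      · have hmod := Nat.xor_mod_two_eq (m := k) (n := 2^0)
        have hdiv : (k ^^^ 2^0) / 2 = (k / 2) ^^^ (2^0 / 2) := Nat.xor_div_two
        simp only [pow_zero] at hmod hdiv ⊢
        norm_num at hdiv
        have hdm := Nat.div_add_mod (k ^^^ 1) 2
        omega

theorem pv_bitLength_pow (j : Nat) : PySem.Int.bitLength ((2^j : Nat) : Int) = j + 1 := by
  induction j with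
  | zero => decide
  | succ j ih =>
    rw [PySem.Int.bitLength_natCast (by positivity)]
    have : 2^(j+1) / 2 = 2^j := by rw [Nat.pow_succ]; omega
    rw [this, ih]

-- a & -b evaluated for a = k ≥ 1, b = k (Python's s & -s)
theorem pv_band_neg (k : Nat) (hk : 0 < k) :
    PySem.Int.band (k : Int) (-(k : Int)) = ((k - (k &&& (k - 1)) : Nat) : Int) := by
  have hneg : ¬ (0:Int) ≤ -(k : Int) := by omega
  simp only [PySem.Int.band, Int.natCast_nonneg, if_true, hneg, if_false]
  have h1 : (-(-(k:Int)) - 1).toNat = k - 1 := by omega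
  have h2 : ((k:Int)).toNat = k := by omega
  rw [h1, h2]

-- ---------- popcount ----------

def pvPc (s : Nat) : Nat := PySem.Int.bitCount (s : Int)

theorem pvPc_halve (s : Nat) (hs : 0 < s) : pvPc s = s % 2 + pvPc (s / 2) :=
  PySem.Int.bitCount_natCast hs

theorem pvPc_zero : pvPc 0 = 0 := by simp [pvPc, PySem.Int.bitCount_zero]

theorem pvPc_split (h : Nat) : ∀ s2 s1, s1 < 2^h → pvPc (s1 + 2^h * s2) = pvPc s1 + pvPc s2 := by
  induction h with
  | zero =>
    intro s2 s1 hs1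
    have : s1 = 0 := by omega
    subst this
    simp [pvPc_zero]
  | succ h ih =>
    intro s2 s1 hs1
    have hpow : (2:Nat)^(h+1) = 2 * 2^h := by rw [Nat.pow_succ]; ring
    have hlin : 2^(h+1) * s2 = 2 * (2^h * s2) := by rw [hpow]; ring
    by_cases hz : s1 + 2^(h+1) * s2 = 0
    · have h1 : s1 = 0 := by omega
      have h2 : s2 = 0 := by
        rcases Nat.mul_eq_zero.mp (by omega : 2^(h+1) * s2 = 0) with hc | hc
        · exact absurd hc (by positivity)
        · exact hc
      subst h1; subst h2; simp [pvPc_zero]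
    · rw [pvPc_halve _ (by omega)]
      have hmod : (s1 + 2^(h+1) * s2) % 2 = s1 % 2 := by omega
      have hdiv : (s1 + 2^(h+1) * s2) / 2 = s1 / 2 + 2^h * s2 := by omega
      rw [hmod, hdiv, ih s2 (s1/2) (by omega)]
      by_cases h1 : s1 = 0
      · subst h1; simp [pvPc_zero]
      · rw [pvPc_halve s1 (by omega)]; ring

-- popcount changes by at most one when a single bit is toggled
theorem pvPc_xor_pow : ∀ (j s : Nat), pvPc (s ^^^ 2^j) ≤ pvPc s + 1 := by
  intro j
  induction j with
  | zero =>
    intro s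
    by_cases hz : s ^^^ 2^0 = 0
    · rw [hz, pvPc_zero]; omega
    · rw [pvPc_halve _ (by omega)]
      have hmod := Nat.xor_mod_two_eq (m := s) (n := 2^0)
      have hdiv : (s ^^^ 2^0) / 2 = s / 2 ^^^ (2^0 / 2) := Nat.xor_div_two
      simp only [pow_zero] at hmod hdiv ⊢
      norm_num at hdiv
      rw [hdiv]
      by_cases hs : s = 0
      · subst hs; simp [pvPc_zero]
      · rw [pvPc_halve s (by omega)]; omega
  | succ j ih =>
    intro s
    by_cases hz : s ^^^ 2^(j+1) = 0
    · rw [hz, pvPc_zero]; omega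
    · have hm2 : (2:Nat)^(j+1) % 2 = 0 := by
        have : (2:Nat)^(j+1) = 2 * 2^j := by rw [Nat.pow_succ]; ring
        omega
      have hmod := Nat.xor_mod_two_eq (m := s) (n := 2^(j+1))
      have hdiv : (s ^^^ 2^(j+1)) / 2 = s / 2 ^^^ (2^(j+1) / 2) := Nat.xor_div_two
      have hp : 2^(j+1) / 2 = 2^j := by
        have : (2:Nat)^(j+1) = 2 * 2^j := by rw [Nat.pow_succ]; ring
        omega
      rw [hp] at hdiv
      rw [pvPc_halve _ (by omega), hdiv]
      have hih := ih (s / 2)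
      by_cases hs : s = 0
      · subst hs
        simp only [Nat.zero_div, pvPc_zero] at *
        omega
      · rw [pvPc_halve s (by omega)]
        omega

-- ---------- subset xor over Nat (A's spec language) ----------

def pvXorN : List Nat → Nat → Nat
  | [], _ => 0
  | b :: bs, s => if s % 2 = 1 then b ^^^ pvXorN bs (s / 2) else pvXorN bs (s / 2)

theorem pvXorN_zero (ms : List Nat) : pvXorN ms 0 = 0 := by
  induction ms with
  | nil => rfl
  | cons b bs ih => simpa [pvXorN] using ih

theorem pvXorN_append (l1 l2 : List Nat) : ∀ s,
    pvXorN (l1 ++ l2) s = pvXorN l1 (s % 2^l1.length) ^^^ pvXorN l2 (s / 2^l1.length) := by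
  induction l1 with
  | nil => intro s; simp [pvXorN]
  | cons b bs ih =>
    intro s
    have hK : (2:Nat)^(b :: bs).length = 2 * 2^bs.length := by
      simp [List.length_cons, Nat.pow_succ]; ring
    have hmod2 : s % 2^(b :: bs).length % 2 = s % 2 := by
      rw [hK]; exact Nat.mod_mul_right_mod s 2 (2^bs.length)
    have hdiv2 : s % 2^(b :: bs).length / 2 = s / 2 % 2^bs.length := by
      rw [hK]; exact Nat.mod_mul_right_div_self s 2 (2^bs.length)
    have hddd : s / 2^(b :: bs).length = s / 2 / 2^bs.length := by
      rw [hK, Nat.div_div_eq_div_mul]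
    simp only [List.cons_append, pvXorN, hmod2, hdiv2, hddd, ih (s / 2)]
    by_cases hp : s % 2 = 1 <;> simp [hp, Nat.xor_assoc]

theorem pvXorN_toggle (ms : List Nat) : ∀ s j, j < ms.length →
    pvXorN ms (s ^^^ 2^j) = pvXorN ms s ^^^ ms.getD j 0 := by
  induction ms with
  | nil => intro s j hj; simp at hj
  | cons b bs ih =>
    intro s j hj
    cases j with
    | zero =>
      have hmod := Nat.xor_mod_two_eq (m := s) (n := 2^0)
      have hdiv : (s ^^^ 2^0) / 2 = s / 2 ^^^ (2^0 / 2) := Nat.xor_div_two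
      simp only [pow_zero] at hmod hdiv ⊢
      norm_num at hdiv
      simp only [pvXorN, List.getD_cons_zero, hdiv]
      rcases Nat.mod_two_eq_zero_or_one s with hp | hp
      · have h1 : (s ^^^ 1) % 2 = 1 := by omega
        simp [hp, h1, Nat.xor_comm]
      · have h1 : (s ^^^ 1) % 2 = 0 := by omega
        simp only [hp, h1, if_true]
        rw [if_neg (by omega)]
        rw [Nat.xor_comm b (pvXorN bs (s/2)), Nat.xor_assoc, Nat.xor_self, Nat.xor_zero]
    | succ j =>
      have hm2 : (2:Nat)^(j+1) % 2 = 0 := by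
        have : (2:Nat)^(j+1) = 2 * 2^j := by rw [Nat.pow_succ]; ring
        omega
      have hmod := Nat.xor_mod_two_eq (m := s) (n := 2^(j+1))
      have hdiv : (s ^^^ 2^(j+1)) / 2 = s / 2 ^^^ (2^(j+1) / 2) := Nat.xor_div_two
      have hp : 2^(j+1) / 2 = 2^j := by
        have : (2:Nat)^(j+1) = 2 * 2^j := by rw [Nat.pow_succ]; ring
        omega
      rw [hp] at hdiv
      have hsm : (s ^^^ 2^(j+1)) % 2 = s % 2 := by omega
      simp only [pvXorN, List.getD_cons_succ, hsm, hdiv, ih (s/2) j (by simpa using hj)]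
      by_cases hpar : s % 2 = 1 <;> simp [hpar, Nat.xor_assoc]

-- ---------- subset xor over Int, accumulator form (B's spec language) ----------

def pvXorI : List Int → Nat → Int → Int
  | [], _, a => a
  | b :: bs, s, a => pvXorI bs (s / 2) (if s % 2 = 1 then PySem.Int.bxor a b else a)

theorem pvXorI_cast (msN : List Nat) : ∀ (s aN : Nat),
    pvXorI (msN.map (Nat.cast : Nat → Int)) s (aN : Int) = ((aN ^^^ pvXorN msN s : Nat) : Int) := by
  induction msN with
  | nil => intro s aN; simp [pvXorI, pvXorN]
  | cons b bs ih =>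
    intro s aN
    rw [List.map_cons]
    show pvXorI _ (s/2) _ = _
    by_cases hp : s % 2 = 1
    · have h1 : (if s % 2 = 1 then PySem.Int.bxor (aN : Int) (b : Int) else (aN : Int)) = ((aN ^^^ b : Nat) : Int) := by
        simp [hp, PySem.Int.bxor_natCast]
      rw [h1, ih (s/2) (aN ^^^ b)]
      have h2 : pvXorN (b :: bs) s = b ^^^ pvXorN bs (s/2) := by simp [pvXorN, hp]
      rw [h2, Nat.xor_assoc]
    · have h1 : (if s % 2 = 1 then PySem.Int.bxor (aN : Int) (b : Int) else (aN : Int)) = (aN : Int) := by simp [hp]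
      rw [h1, ih (s/2) aN]
      have h2 : pvXorN (b :: bs) s = pvXorN bs (s/2) := by simp [pvXorN, hp]
      rw [h2]

-- ---------- "best value" characterisation ----------

def pvIsBest (o : Option Int) (P : Int → Prop) : Prop :=
  (∀ k, o = some k → P k ∧ ∀ k', P k' → k ≤ k') ∧ (o = none → ∀ k, ¬ P k)

theorem pvIsBest_congr {o : Option Int} {P Q : Int → Prop}
    (h : pvIsBest o P) (hpq : ∀ k, P k ↔ Q k) : pvIsBest o Q := by
  refine ⟨fun k hk => ?_, fun hn k => ?_⟩
  · obtain ⟨h1, h2⟩ := h.1 k hk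
    exact ⟨(hpq k).mp h1, fun k' hk' => h2 k' ((hpq k').mpr hk')⟩
  · exact fun hq => h.2 hn k ((hpq k).mpr hq)

theorem pvIsBest_unique {o1 o2 : Option Int} {P : Int → Prop}
    (h1 : pvIsBest o1 P) (h2 : pvIsBest o2 P) : o1 = o2 := by
  cases o1 with
  | none =>
    cases o2 with
    | none => rfl
    | some k => exact absurd (h2.1 k rfl).1 (h1.2 rfl k)
  | some k =>
    cases o2 with
    | none => exact absurd (h1.1 k rfl).1 (h2.2 rfl k)
    | some k' =>
      have a1 := h1.1 k rfl; have a2 := h2.1 k' rfl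
      have := a1.2 k' a2.1; have := a2.2 k a1.1
      congr 1; omega

-- two "best" values of mutually cofinal-below sets coincide
theorem pvIsBest_unique_embed {o1 o2 : Option Int} {P Q : Int → Prop}
    (h1 : pvIsBest o1 P) (h2 : pvIsBest o2 Q)
    (hpq : ∀ k, P k → ∃ k', k' ≤ k ∧ Q k') (hqp : ∀ k, Q k → ∃ k', k' ≤ k ∧ P k') : o1 = o2 := by
  cases o1 with
  | none =>
    cases o2 with
    | none => rfl
    | some k =>
      obtain ⟨k', _, hk'⟩ := hqp k (h2.1 k rfl).1
      exact absurd hk' (h1.2 rfl k')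
  | some k =>
    cases o2 with
    | none =>
      obtain ⟨k', _, hk'⟩ := hpq k (h1.1 k rfl).1
      exact absurd hk' (h2.2 rfl k')
    | some k' =>
      have a1 := h1.1 k rfl; have a2 := h2.1 k' rfl
      obtain ⟨q1, hq1, hq1'⟩ := hpq k a1.1
      obtain ⟨p1, hp1, hp1'⟩ := hqp k' a2.1
      have := a1.2 p1 hp1'
      have := a2.2 q1 hq1'
      congr 1; omega

def pvOptUpd (b : Option Int) (v : Int) : Option Int :=
  match b with
  | none => some v
  | some w => if v < w then some v else some w

theorem pvIsBest_upd {b : Option Int} {P R : Int → Prop} {v : Int}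
    (hb : pvIsBest b P) (hv : R v) (hmin : ∀ k, R k → v ≤ k) :
    pvIsBest (pvOptUpd b v) (fun k => P k ∨ R k) := by
  cases b with
  | none =>
    refine ⟨fun k hk => ?_, by simp [pvOptUpd]⟩
    simp only [pvOptUpd, Option.some.injEq] at hk
    subst hk
    exact ⟨Or.inr hv, fun k' hk' => hk'.elim (fun h => absurd h (hb.2 rfl k')) (hmin k')⟩
  | some w =>
    have hw := hb.1 w rfl
    refine ⟨fun k hk => ?_, by simp [pvOptUpd]; split <;> simp⟩
    simp only [pvOptUpd] at hk
    split at hk <;> simp only [Option.some.injEq] at hk <;> subst hk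
    · exact ⟨Or.inr hv, fun k' hk' => hk'.elim (fun h => by have := hw.2 k' h; omega) (hmin k')⟩
    · exact ⟨Or.inl hw.1, fun k' hk' => hk'.elim (hw.2 k') (fun h => by have := hmin k' h; omega)⟩

theorem pvIsBest_skip {b : Option Int} {P R : Int → Prop}
    (hb : pvIsBest b P) (hr : ∀ k, ¬ R k) : pvIsBest b (fun k => P k ∨ R k) := by
  refine ⟨fun k hk => ?_, fun hn k => ?_⟩
  · obtain ⟨h1, h2⟩ := hb.1 k hk
    exact ⟨Or.inl h1, fun k' hk' => hk'.elim (h2 k') (fun h => absurd h (hr k'))⟩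
  · exact fun hq => hq.elim (hb.2 hn k) (hr k)

-- ---------- the target bitmask ----------

def pvTNat : List Char → Nat → Nat
  | [], _ => 0
  | c :: cs, i => (if c = '#' then 2^i else 0) ||| pvTNat cs (i + 1)

theorem pvTarget_fold (cs : List Char) : ∀ (i a : Nat),
    (PySem.List.enumerate cs (i : Int)).foldl
      (fun target p => if p.2 = '#' then PySem.Int.bor target ((1:Int) <<< p.1.toNat) else target) (a : Int)
      = ((a ||| pvTNat cs i : Nat) : Int) := by
  induction cs with
  | nil => intro i a; simp [PySem.List.enumerate, pvTNat]
  | cons c cs ih =>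
    intro i a
    have he : PySem.List.enumerate (c :: cs) (i : Int) = ((i : Int), c) :: PySem.List.enumerate cs ((i : Int) + 1) :=
      by simp [PySem.List.enumerate]
    have hcast : ((i : Int) + 1) = ((i + 1 : Nat) : Int) := by push_cast; ring
    have ht : ((i:Int)).toNat = i := by omega
    rw [he, List.foldl_cons, hcast]
    by_cases hc : c = '#'
    · have hacc : (if ((((i : Int), c) : Int × Char)).2 = '#'
          then PySem.Int.bor (a : Int) ((1:Int) <<< (((((i : Int), c) : Int × Char)).1.toNat : Int))
          else (a : Int)) = ((a ||| 2^i : Nat) : Int) := by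
        rw [if_pos hc]
        show PySem.Int.bor (a : Int) ((1:Int) <<< ((((i : Int)).toNat : Nat) : Int)) = _
        rw [ht, Int.one_shiftLeft, PySem.Int.bor_natCast]
      rw [hacc, ih (i+1) (a ||| 2^i)]
      have hassoc : a ||| 2^i ||| pvTNat cs (i+1) = a ||| (2^i ||| pvTNat cs (i+1)) := Nat.or_assoc _ _ _
      rw [hassoc]
      simp [pvTNat, hc]
    · have hacc : (if ((((i : Int), c) : Int × Char)).2 = '#'
          then PySem.Int.bor (a : Int) ((1:Int) <<< (((((i : Int), c) : Int × Char)).1.toNat : Int))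
          else (a : Int)) = (a : Int) := by rw [if_neg hc]
      rw [hacc, ih (i+1) a]
      simp [pvTNat, hc]

theorem pvTargetA_eq (p : String) : pvTargetA p = ((pvTNat p.toList 0 : Nat) : Int) := by
  have h := pvTarget_fold p.toList 0 0
  simpa [pvTargetA] using h

theorem pvTNat_zero_iff (cs : List Char) : ∀ i, (pvTNat cs i = 0 ↔ '#' ∉ cs) := by
  induction cs with
  | nil => intro i; simp [pvTNat]
  | cons c cs ih =>
    intro i
    simp only [pvTNat, List.mem_cons]
    constructor
    · intro h
      obtain ⟨h1, h2⟩ := pv_or_eq_zero _ _ h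
      have hc2 : ¬ c = '#' := by
        intro hc; rw [hc] at h1; simp at h1
      refine fun hor => ?_
      rcases hor with hcc | hcc
      · exact hc2 hcc.symm
      · exact (ih (i+1)).mp h2 hcc
    · intro h
      push Not at h
      have hc : ¬ c = '#' := fun hcc => h.1 hcc.symm
      simp [hc, (ih (i+1)).mpr h.2]

theorem pvTNat_lt (cs : List Char) : ∀ i, pvTNat cs i < 2^(cs.length + i) := by
  induction cs with
  | nil => intro i; simp [pvTNat]
  | cons c cs ih =>
    intro i
    have h1 : (if c = '#' then 2^i else 0) < 2^((c :: cs).length + i) := by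
      have : (2:Nat)^i < 2^((c :: cs).length + i) :=
        Nat.pow_lt_pow_right (by norm_num) (by simp only [List.length_cons]; omega)
      split <;> [exact this; positivity]
    have h2 : pvTNat cs (i + 1) < 2^((c :: cs).length + i) := by
      have := ih (i + 1)
      have he : cs.length + (i + 1) = (c :: cs).length + i := by simp only [List.length_cons]; omega
      rwa [he] at this
    exact Nat.or_lt_two_pow h1 h2

-- ---------- A's subset enumeration computes the best subset ----------

theorem pvSolveBySubset_isBest (masks : List Int) (msN : List Nat)
    (hm : masks = msN.map (Nat.cast : Nat → Int)) (t : Nat) (ht : t ≠ 0) :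
    pvIsBest (pvSolveBySubset (t : Int) masks)
      (fun k => ∃ s, 0 < s ∧ s < 2^masks.length ∧ pvXorN msN s = t ∧ k = ((pvPc s : Nat) : Int)) := by
  have hlen : msN.length = masks.length := by rw [hm, List.length_map]
  set M := 2^masks.length with hM
  have hMpos : 0 < M := by positivity
  have key : ∀ u, u ≤ M - 1 → ∃ c b,
      (PySem.List.pyRange 1 ((u:Int) + 1)).foldl (pvSubsetStep masks (t : Int)) (List.replicate M (0:Int), none) = (c, b)
      ∧ c.length = M
      ∧ (∀ i, i < M → c.getD i 0 = if i ≤ u then ((pvXorN msN i : Nat) : Int) else 0)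
      ∧ pvIsBest b (fun k => ∃ s, 0 < s ∧ s ≤ u ∧ pvXorN msN s = t ∧ k = ((pvPc s : Nat) : Int)) := by
    intro u
    induction u with
    | zero =>
      intro _
      refine ⟨List.replicate M (0:Int), none, ?_, by simp, ?_, ?_⟩
      · rw [PySem.List.pyRange_one_eq_nil (by norm_num)]; rfl
      · intro i hi
        rcases Nat.eq_zero_or_pos i with hz | hp
        · subst hz; simp [pvXorN_zero]
        · rw [if_neg (by omega)]; simp
      · exact ⟨fun k hk => by simp at hk, fun _ k hk => by obtain ⟨s, hs, hsu, _⟩ := hk; omega⟩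
    | succ u ihu =>
      intro hu1
      obtain ⟨c, b, hfold, hclen, hcval, hbb⟩ := ihu (by omega)
      set k := u + 1 with hk
      have hkM : k < M := by omega
      have hkpos : 0 < k := by omega
      obtain ⟨j, hand, hle, hxorj⟩ := pv_lsb_spec k hkpos
      have hjm : j < masks.length := by
        have h2j : (2:Nat)^j < 2^masks.length := lt_of_le_of_lt hle (hM ▸ hkM)
        exact (Nat.pow_lt_pow_iff_right (by norm_num)).mp h2j
      have hcast1 : ((k:Nat):Int) = (u:Int) + 1 := by rw [hk]; push_cast; ring
      have hpeel : PySem.List.pyRange 1 (((u+1:Nat):Int) + 1) =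
          PySem.List.pyRange 1 ((u:Int) + 1) ++ [((k:Nat):Int)] := by
        rw [hcast1]
        exact PySem.List.pyRange_one_succ_right (by omega)
      rw [hpeel, List.foldl_append, hfold]
      simp only [List.foldl_cons, List.foldl_nil]
      -- evaluate the step at s = k
      have hband : PySem.Int.band ((k:Nat):Int) (-((k:Nat):Int)) = ((2^j : Nat) : Int) := by
        rw [pv_band_neg k hkpos, hand]
        rw [Nat.sub_sub_self hle]
      have hbl : (PySem.Int.bitLength ((2^j : Nat) : Int) : Int) - 1 = ((j:Nat):Int) := by
        rw [pv_bitLength_pow]; push_cast; ring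
      have hxv : PySem.Int.bxor ((k:Nat):Int) ((2^j : Nat):Int) = (((k - 2^j : Nat)):Int) := by
        rw [PySem.Int.bxor_natCast, hxorj]
      have hgetc : PySem.List.pyGetD c (((k - 2^j : Nat)):Int) 0 = ((pvXorN msN (k - 2^j) : Nat) : Int) := by
        rw [PySem.List.pyGetD_natCast]
        rw [hcval (k - 2^j) (lt_of_le_of_lt (Nat.sub_le k _) hkM)]
        have h1 : (1:Nat) ≤ 2^j := Nat.one_le_two_pow
        have h2 : k - 2^j ≤ k - 1 := Nat.sub_le_sub_left h1 k
        rw [if_pos (h2.trans (by omega))]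
      have hgetm : PySem.List.pyGetD masks ((j:Nat):Int) 0 = ((msN.getD j 0 : Nat) : Int) := by
        rw [PySem.List.pyGetD_natCast, hm]
        have hjn : j < msN.length := by omega
        rw [List.getD_eq_getElem?_getD, List.getElem?_map, List.getD_eq_getElem?_getD]
        rw [List.getElem?_eq_getElem hjn]
        simp
      have hv : PySem.Int.bxor (PySem.List.pyGetD c (PySem.Int.bxor ((k:Nat):Int) (PySem.Int.band ((k:Nat):Int) (-((k:Nat):Int)))) 0)
            (PySem.List.pyGetD masks ((PySem.Int.bitLength (PySem.Int.band ((k:Nat):Int) (-((k:Nat):Int))) : Int) - 1) 0)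
          = ((pvXorN msN k : Nat) : Int) := by
        rw [hband, hbl, hxv, hgetc, hgetm, PySem.Int.bxor_natCast]
        congr 1
        have hjN : j < msN.length := by omega
        rw [← hxorj, pvXorN_toggle msN k j hjN]
        rw [Nat.xor_assoc, Nat.xor_self, Nat.xor_zero]
      have hsetc : PySem.List.pySetD c (((k:Nat)):Int) ((pvXorN msN k : Nat) : Int) =
          c.set k ((pvXorN msN k : Nat) : Int) := PySem.List.pySetD_natCast c k _
      have hnewval : ∀ i, i < M → (c.set k ((pvXorN msN k : Nat) : Int)).getD i 0 =
          if i ≤ u + 1 then ((pvXorN msN i : Nat) : Int) else 0 := by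
        intro i hi
        rw [List.getD_eq_getElem?_getD, List.getElem?_set]
        by_cases hik : k = i
        · subst hik
          rw [if_pos rfl, if_pos (by omega), if_pos (by omega)]
          rfl
        · rw [if_neg hik, ← List.getD_eq_getElem?_getD, hcval i hi]
          by_cases hiu : i ≤ u
          · rw [if_pos hiu, if_pos (by omega)]
          · rw [if_neg hiu, if_neg (by omega)]
      have hpred : ∀ (bnew : Option Int),
          pvIsBest bnew (fun k' => (∃ s, 0 < s ∧ s ≤ u ∧ pvXorN msN s = t ∧ k' = ((pvPc s : Nat) : Int))
            ∨ (pvXorN msN k = t ∧ k' = ((pvPc k : Nat) : Int))) →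
          pvIsBest bnew (fun k' => ∃ s, 0 < s ∧ s ≤ u + 1 ∧ pvXorN msN s = t ∧ k' = ((pvPc s : Nat) : Int)) := by
        intro bnew hbn
        refine pvIsBest_congr hbn (fun k' => ?_)
        constructor
        · rintro (⟨s, h1, h2, h3, h4⟩ | ⟨h1, h2⟩)
          · exact ⟨s, h1, by omega, h3, h4⟩
          · exact ⟨k, hkpos, le_refl _, h1, h2⟩
        · rintro ⟨s, h1, h2, h3, h4⟩
          rcases Nat.lt_or_ge s (u+1) with hs | hs
          · exact Or.inl ⟨s, h1, by omega, h3, h4⟩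
          · have : s = k := by omega
            subst this
            exact Or.inr ⟨h3, h4⟩
      simp only [pvSubsetStep, hv, hsetc]
      by_cases hhit : pvXorN msN k = t
      · rw [if_pos (by exact_mod_cast congrArg (Nat.cast : Nat → Int) hhit)]
        have hupd := pvIsBest_upd (v := ((PySem.Int.bitCount ((k:Nat):Int) : Nat) : Int))
          (R := fun k' => pvXorN msN k = t ∧ k' = ((pvPc k : Nat) : Int)) hbb ⟨hhit, rfl⟩
          (fun k' hk' => hk'.2 ▸ le_of_eq rfl)
        cases b with
        | none =>
          exact ⟨c.set k ((pvXorN msN k : Nat) : Int), some ((PySem.Int.bitCount ((k:Nat):Int) : Nat) : Int),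
            rfl, by simpa using hclen, hnewval, hpred _ hupd⟩
        | some w =>
          refine ⟨c.set k ((pvXorN msN k : Nat) : Int),
            pvOptUpd (some w) ((PySem.Int.bitCount ((k:Nat):Int) : Nat) : Int),
            ?_, by simpa using hclen, hnewval, hpred _ hupd⟩
          by_cases hpw : ((PySem.Int.bitCount ((k:Nat):Int) : Nat) : Int) < w <;> simp [pvOptUpd, hpw]
      · rw [if_neg (fun hc => hhit (by exact_mod_cast hc))]
        refine ⟨_, _, rfl, by simpa using hclen, hnewval, ?_⟩
        refine hpred b (pvIsBest_skip hbb ?_)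
        exact fun k' hk' => hhit hk'.1
  -- assemble
  obtain ⟨c, b, hfold, _, _, hbb⟩ := key (M - 1) (le_refl _)
  have hM1 : (((M - 1 : Nat)):Int) + 1 = ((M:Nat):Int) := by omega
  rw [hM1] at hfold
  have hshift : (1:Int) <<< masks.length = ((M : Nat) : Int) := by
    rw [Int.shiftLeft_eq, hM]; push_cast; ring
  have hrepl : PySem.List.pyRepeat [(0:Int)] ((1:Int) <<< masks.length) = List.replicate M (0:Int) := by
    rw [hshift, PySem.List.pyRepeat_singleton, Int.toNat_natCast]
  have hinit : (if (t:Int) = 0 then (some 0 : Option Int) else none) = none := by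
    rw [if_neg (by exact_mod_cast ht)]
  unfold pvSolveBySubset
  dsimp only
  rw [hrepl, hinit, hshift, hfold]
  exact pvIsBest_congr hbb (fun k' => by
    constructor
    · rintro ⟨s, h1, h2, h3, h4⟩; exact ⟨s, h1, by omega, h3, h4⟩
    · rintro ⟨s, h1, h2, h3, h4⟩; exact ⟨s, h1, by omega, h3, h4⟩)

-- ---------- walks: pressing a sequence of buttons (repetition allowed) ----------

inductive pvRk (ms : List Nat) : Nat → Nat → Prop
  | zero : pvRk ms 0 0
  | step (e x b : Nat) : pvRk ms e x → b ∈ ms → pvRk ms (e+1) (x ^^^ b)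

theorem pv_exists_least (p : Nat → Prop) : ∀ e, p e → ∃ m, p m ∧ ∀ k < m, ¬ p k := by
  intro e
  induction e using Nat.strong_induction_on with
  | _ e ih =>
    intro he
    by_cases h : ∃ k, k < e ∧ p k
    · obtain ⟨k, hk, hpk⟩ := h
      exact ih k hk hpk
    · exact ⟨e, he, fun k hk hpk => h ⟨k, hk, hpk⟩⟩

theorem pvRk_lt (n : Nat) (ms : List Nat) (hb : ∀ b ∈ ms, b < 2^n) :
    ∀ e x, pvRk ms e x → x < 2^n := by
  intro e x h
  induction h with
  | zero => positivity
  | step e y b _ hbm ih => exact Nat.xor_lt_two_pow ih (hb b hbm)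

theorem pvRk_mono (b : Nat) (bs : List Nat) : ∀ e x, pvRk bs e x → pvRk (b :: bs) e x := by
  intro e x h
  induction h with
  | zero => exact pvRk.zero
  | step e y c _ hcm ih => exact pvRk.step e y c ih (List.mem_cons_of_mem _ hcm)

theorem pvSubset_walk (ms : List Nat) : ∀ s, s < 2^ms.length → pvRk ms (pvPc s) (pvXorN ms s) := by
  induction ms with
  | nil =>
    intro s hs
    have : s = 0 := by simpa using hs
    subst this
    rw [pvPc_zero]
    exact pvRk.zero
  | cons b bs ih =>
    intro s hs
    have hs2 : s / 2 < 2^bs.length := by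
      have : (2:Nat)^(b :: bs).length = 2 * 2^bs.length := by
        simp [List.length_cons, Nat.pow_succ]; ring
      omega
    have hbase := pvRk_mono b bs _ _ (ih (s / 2) hs2)
    by_cases hp : s % 2 = 1
    · have hxor : pvXorN (b :: bs) s = pvXorN bs (s / 2) ^^^ b := by
        simp [pvXorN, hp, Nat.xor_comm]
      have hpc : pvPc s = pvPc (s / 2) + 1 := by
        rw [pvPc_halve s (by omega)]; omega
      rw [hxor, hpc]
      exact pvRk.step _ _ b hbase List.mem_cons_self
    · have hxor : pvXorN (b :: bs) s = pvXorN bs (s / 2) := by simp [pvXorN, hp]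
      have hpc : pvPc s = pvPc (s / 2) := by
        rcases Nat.eq_zero_or_pos s with hz | hpos
        · subst hz; simp
        · rw [pvPc_halve s hpos]; omega
      rw [hxor, hpc]
      exact hbase

theorem pvWalk_subset (ms : List Nat) : ∀ e x, pvRk ms e x →
    ∃ s, s < 2^ms.length ∧ pvXorN ms s = x ∧ pvPc s ≤ e := by
  intro e x h
  induction h with
  | zero => exact ⟨0, by positivity, pvXorN_zero ms, by rw [pvPc_zero]⟩
  | step e y b _ hbm ih =>
    obtain ⟨s, hs, hxs, hpc⟩ := ih
    obtain ⟨j, hj, hjb⟩ := List.mem_iff_getElem.mp hbm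
    have hjd : ms.getD j 0 = b := by
      rw [List.getD_eq_getElem?_getD, List.getElem?_eq_getElem hj]
      simpa using hjb
    refine ⟨s ^^^ 2^j, ?_, ?_, ?_⟩
    · exact Nat.xor_lt_two_pow hs (Nat.pow_lt_pow_right (by norm_num) hj)
    · rw [pvXorN_toggle ms s j hj, hxs, hjd]
    · calc pvPc (s ^^^ 2^j) ≤ pvPc s + 1 := pvPc_xor_pow j s
        _ ≤ e + 1 := by omega

-- ---------- small list facts used by the BFS proof ----------

theorem pv_getD_default (l : List Int) (i : Nat) (h : i < l.length) (d1 d2 : Int) :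
    l.getD i d1 = l.getD i d2 := by
  rw [List.getD_eq_getElem l d1 h, List.getD_eq_getElem l d2 h]

theorem pv_count_set (v : Int) : ∀ (l : List Int) (j : Nat), j < l.length →
    l.getD j 0 = -1 → v ≠ -1 → (l.set j v).count (-1) + 1 = l.count (-1) := by
  intro l
  induction l with
  | nil => intro j h; simp at h
  | cons a l ih =>
    intro j hj hv hne
    cases j with
    | zero =>
      have ha : a = -1 := by simpa using hv
      simp [ha, hne]
    | succ j =>
      have hj' : j < l.length := by simpa using hj
      have hv' : l.getD j 0 = -1 := by simpa using hv
      have := ih j hj' hv' hne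
      simp only [List.set_cons_succ, List.count_cons]
      omega

-- ---------- the BFS invariant ----------

-- dist records exact minimal walk lengths; q is the frontier (values d, then d+1);
-- every visited state not in q has all its neighbours visited; the target is unvisited.
def pvInv (n : Nat) (msN : List Nat) (t : Nat) (dist q : List Int) : Prop :=
  dist.length = 2^n ∧
  (∀ x : Nat, x < 2^n → dist.getD x 0 = -1 ∨
     ∃ e : Nat, dist.getD x 0 = (e:Int) ∧ pvRk msN e x ∧ ∀ e' < e, ¬ pvRk msN e' x) ∧
  dist.getD 0 0 ≠ -1 ∧
  dist.getD t 0 = -1 ∧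
  (∃ d : Nat, ∃ l1 l2 : List Int, q = l1 ++ l2 ∧
     (∀ y ∈ l1, ∃ x : Nat, x < 2^n ∧ y = (x:Int) ∧ dist.getD x 0 = (d:Int)) ∧
     (∀ y ∈ l2, ∃ x : Nat, x < 2^n ∧ y = (x:Int) ∧ dist.getD x 0 = ((d+1:Nat):Int))) ∧
  (∀ x : Nat, x < 2^n → dist.getD x 0 ≠ -1 →
     ((x:Int) ∈ q ∨ ∀ b ∈ msN, dist.getD (x ^^^ b) 0 ≠ -1))

-- completeness: while the frontier level is d, every state with a walk of length ≤ d is visited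
theorem pvInv_comp (n : Nat) (msN : List Nat) (hball : ∀ b ∈ msN, b < 2^n)
    (dist q : List Int) (d : Nat) (l1 l2 : List Int) (hq : q = l1 ++ l2)
    (h1 : ∀ y ∈ l1, ∃ x : Nat, x < 2^n ∧ y = (x:Int) ∧ dist.getD x 0 = (d:Int))
    (h2 : ∀ y ∈ l2, ∃ x : Nat, x < 2^n ∧ y = (x:Int) ∧ dist.getD x 0 = ((d+1:Nat):Int))
    (hB : ∀ x : Nat, x < 2^n → dist.getD x 0 = -1 ∨
       ∃ e : Nat, dist.getD x 0 = (e:Int) ∧ pvRk msN e x ∧ ∀ e' < e, ¬ pvRk msN e' x)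
    (hV0 : dist.getD 0 0 ≠ -1)
    (hC : ∀ x : Nat, x < 2^n → dist.getD x 0 ≠ -1 →
       ((x:Int) ∈ q ∨ ∀ b ∈ msN, dist.getD (x ^^^ b) 0 ≠ -1)) :
    ∀ e, e ≤ d → ∀ x, pvRk msN e x → dist.getD x 0 ≠ -1 := by
  intro e
  induction e using Nat.strong_induction_on with
  | _ e ih =>
    intro hed x hRk
    by_cases hless : ∃ e' , e' < e ∧ pvRk msN e' x
    · obtain ⟨e', he', hRk'⟩ := hless
      exact ih e' he' (by omega) x hRk'
    · cases hRk with
      | zero => exact hV0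
      | step e'' y b hRky hbm =>
        have hy : dist.getD y 0 ≠ -1 := ih e'' (by omega) (by omega) y hRky
        have hylt : y < 2^n := pvRk_lt n msN hball e'' y hRky
        obtain ⟨ey, hval, hRkey, hmin⟩ := (hB y hylt).resolve_left (fun hc => hy hc)
        have heyd : ey ≤ e'' := by
          by_contra hgt
          exact hmin e'' (by omega) hRky
        have hynq : (y:Int) ∉ q := by
          intro hin
          rw [hq] at hin
          rcases List.mem_append.mp hin with hin1 | hin2
          · obtain ⟨x', _, hx'eq, hx'val⟩ := h1 _ hin1
            have hxy : y = x' := by exact_mod_cast hx'eq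
            subst hxy
            rw [hval] at hx'val
            have : ey = d := by exact_mod_cast hx'val
            omega
          · obtain ⟨x', _, hx'eq, hx'val⟩ := h2 _ hin2
            have hxy : y = x' := by exact_mod_cast hx'eq
            subst hxy
            rw [hval] at hx'val
            have : ey = d + 1 := by exact_mod_cast hx'val
            omega
        rcases hC y hylt hy with hin | hexp
        · exact absurd hin hynq
        · exact hexp b hbm

-- once the early return has fired, the remaining buttons change nothing
theorem pvBfsInner_some (tg d s : Int) : ∀ (l : List Int) (dist q : List Int) (r : Int),
    pvBfsInner l tg d s (dist, q, some r) = (dist, q, some r) := by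
  intro l
  induction l with
  | nil => intro dist q r; rfl
  | cons b bs ih =>
    intro dist q r
    show pvBfsInner bs tg d s (dist, q, some r) = _
    exact ih dist q r

-- effect of the `for bm in button_masks` body, processing the suffix mlN of the buttons
theorem pvInnerFold (n : Nat) (msN : List Nat) (hball : ∀ b ∈ msN, b < 2^n)
    (t x0 e0 : Nat) (hx0 : x0 < 2^n) (hRk0 : pvRk msN e0 x0) :
    ∀ (mlN : List Nat), (∀ b ∈ mlN, b ∈ msN) →
    ∀ (dist acc : List Int),
    dist.length = 2^n →
    (∀ x : Nat, x < 2^n → dist.getD x 0 = -1 ∨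
       ∃ e : Nat, dist.getD x 0 = (e:Int) ∧ pvRk msN e x ∧ ∀ e' < e, ¬ pvRk msN e' x) →
    dist.getD t 0 = -1 →
    (∀ x : Nat, x < 2^n → dist.getD x 0 = -1 → ∀ e' ≤ e0, ¬ pvRk msN e' x) →
    ∀ res, res = pvBfsInner (mlN.map (Nat.cast : Nat → Int)) ((t:Nat):Int) ((e0:Nat):Int) ((x0:Nat):Int) (dist, acc, none) →
    (res.2.2 = some (((e0:Nat):Int) + 1) ∧ pvRk msN (e0+1) t) ∨
    (res.2.2 = none ∧ ∃ newl : List Int, res.2.1 = acc ++ newl ∧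
      res.1.length = 2^n ∧
      (∀ x : Nat, x < 2^n → res.1.getD x 0 = -1 ∨
         ∃ e : Nat, res.1.getD x 0 = (e:Int) ∧ pvRk msN e x ∧ ∀ e' < e, ¬ pvRk msN e' x) ∧
      res.1.getD t 0 = -1 ∧
      (∀ x : Nat, x < 2^n → dist.getD x 0 ≠ -1 → res.1.getD x 0 = dist.getD x 0) ∧
      (∀ b ∈ mlN, res.1.getD (x0 ^^^ b) 0 ≠ -1) ∧
      (∀ y ∈ newl, ∃ x : Nat, x < 2^n ∧ y = (x:Int) ∧ res.1.getD x 0 = ((e0+1:Nat):Int)) ∧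
      (∀ x : Nat, x < 2^n → dist.getD x 0 = -1 → res.1.getD x 0 ≠ -1 → (x:Int) ∈ newl) ∧
      res.1.count (-1) + newl.length = dist.count (-1)) := by
  intro mlN
  induction mlN with
  | nil =>
    intro _ dist acc hlen hB hT hcomp res hres
    have hres' : res = (dist, acc, none) := by rw [hres]; rfl
    subst hres'
    right
    exact ⟨rfl, [], by simp, hlen, hB, hT, fun x _ _ => rfl, by simp, by simp,
      fun x _ h1 h2 => absurd h1 h2, by simp⟩
  | cons bN mlN' ih =>
    intro hsub dist acc hlen hB hT hcomp res hres
    have hbmem : bN ∈ msN := hsub bN List.mem_cons_self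
    have hbn : bN < 2^n := hball bN hbmem
    set nsN := x0 ^^^ bN with hnsN
    have hns : nsN < 2^n := Nat.xor_lt_two_pow hx0 hbn
    have hxorc : PySem.Int.bxor ((x0:Nat):Int) ((bN:Nat):Int) = ((nsN:Nat):Int) := by
      rw [PySem.Int.bxor_natCast]
    have hstep : pvBfsInner ((bN :: mlN').map (Nat.cast : Nat → Int)) ((t:Nat):Int) ((e0:Nat):Int) ((x0:Nat):Int) (dist, acc, none)
        = pvBfsInner (mlN'.map (Nat.cast : Nat → Int)) ((t:Nat):Int) ((e0:Nat):Int) ((x0:Nat):Int)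
            (if PySem.List.pyGetD dist ((nsN:Nat):Int) 0 = -1 then
              (if ((nsN:Nat):Int) = ((t:Nat):Int) then
                 (PySem.List.pySetD dist ((nsN:Nat):Int) (((e0:Nat):Int) + 1), acc, some (((e0:Nat):Int) + 1))
               else (PySem.List.pySetD dist ((nsN:Nat):Int) (((e0:Nat):Int) + 1), acc ++ [((nsN:Nat):Int)], none))
             else (dist, acc, none)) := by
      simp only [List.map_cons, pvBfsInner, List.foldl_cons, hxorc]
    have hget : PySem.List.pyGetD dist ((nsN:Nat):Int) 0 = dist.getD nsN 0 :=
      PySem.List.pyGetD_natCast dist nsN 0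
    by_cases hfresh : dist.getD nsN 0 = -1
    · have hset : PySem.List.pySetD dist ((nsN:Nat):Int) (((e0:Nat):Int) + 1)
          = dist.set nsN (((e0:Nat):Int) + 1) := PySem.List.pySetD_natCast dist nsN _
      have hvalcast : (((e0:Nat):Int) + 1) = (((e0+1:Nat)):Int) := by push_cast; ring
      have hRkns : pvRk msN (e0+1) nsN := pvRk.step e0 x0 bN hRk0 hbmem
      by_cases hteq : nsN = t
      · -- target found: early return
        left
        have hcast : ((nsN:Nat):Int) = ((t:Nat):Int) := by exact_mod_cast congrArg (Nat.cast : Nat → Int) hteq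
        rw [hres, hstep, if_pos (hget ▸ hfresh), if_pos hcast, pvBfsInner_some]
        exact ⟨rfl, hteq ▸ hRkns⟩
      · -- fresh non-target state: mark it and enqueue
        have hcastne : ¬ ((nsN:Nat):Int) = ((t:Nat):Int) := by
          intro hc; exact hteq (by exact_mod_cast hc)
        set dist1 := dist.set nsN (((e0:Nat):Int) + 1) with hdist1
        have hd1get : ∀ x : Nat, x < 2^n → dist1.getD x 0 =
            if nsN = x then (((e0+1:Nat)):Int) else dist.getD x 0 := by
          intro x hxlt
          rw [hdist1, List.getD_eq_getElem?_getD, List.getElem?_set]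
          by_cases hx : nsN = x
          · rw [if_pos hx, if_pos (by omega), if_pos hx, hvalcast]; rfl
          · rw [if_neg hx, if_neg hx, ← List.getD_eq_getElem?_getD]
        have hd1len : dist1.length = 2^n := by rw [hdist1, List.length_set, hlen]
        have hd1B : ∀ x : Nat, x < 2^n → dist1.getD x 0 = -1 ∨
            ∃ e : Nat, dist1.getD x 0 = (e:Int) ∧ pvRk msN e x ∧ ∀ e' < e, ¬ pvRk msN e' x := by
          intro x hxlt
          by_cases hx : nsN = x
          · subst hx
            right
            rw [hd1get nsN hxlt, if_pos rfl]
            refine ⟨e0+1, rfl, hRkns, ?_⟩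
            intro e' he'
            exact hcomp nsN hns hfresh e' (by omega)
          · rw [hd1get x hxlt, if_neg hx]
            exact hB x hxlt
        have hd1T : dist1.getD t 0 = -1 := by
          rw [hd1get t (by
            -- t is a state index only when t < 2^n; prove from hT and hlen:
            by_contra hge
            push Not at hge
            rw [List.getD_eq_default] at hT
            · exact absurd hT (by norm_num)
            · omega), if_neg hteq]
          exact hT
        have hd1comp : ∀ x : Nat, x < 2^n → dist1.getD x 0 = -1 → ∀ e' ≤ e0, ¬ pvRk msN e' x := by
          intro x hxlt hx1
          rw [hd1get x hxlt] at hx1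
          by_cases hx : nsN = x
          · rw [if_pos hx] at hx1
            exact absurd hx1 (by push_cast; omega)
          · rw [if_neg hx] at hx1
            exact hcomp x hxlt hx1
        have hresstep : res = pvBfsInner (mlN'.map (Nat.cast : Nat → Int)) ((t:Nat):Int) ((e0:Nat):Int) ((x0:Nat):Int)
            (dist1, acc ++ [((nsN:Nat):Int)], none) := by
          rw [hres, hstep, if_pos (hget ▸ hfresh), if_neg hcastne, hset]
        rcases ih (fun b hb => hsub b (List.mem_cons_of_mem _ hb)) dist1 (acc ++ [((nsN:Nat):Int)])
            hd1len hd1B hd1T hd1comp res hresstep with hsome | ⟨hrnone, newl', hq', hlen', hB', hT', hunch', hnb', hnewv', hchg', hcnt'⟩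
      -- some case propagates
        · exact Or.inl hsome
        · right
          refine ⟨hrnone, ((nsN:Nat):Int) :: newl', by rw [hq']; simp, hlen', hB', hT', ?_, ?_, ?_, ?_, ?_⟩
          · -- unchanged on states visited in dist
            intro x hxlt hvis
            have hxne : nsN ≠ x := fun hc => hvis (hc ▸ hfresh)
            have h1 : dist1.getD x 0 = dist.getD x 0 := by rw [hd1get x hxlt, if_neg hxne]
            rw [hunch' x hxlt (h1 ▸ hvis), h1]
          · -- all processed neighbours are visited in the final dist
            intro b hb
            rcases List.mem_cons.mp hb with hbeq | hbtl
            · subst hbeq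
              have h1 : dist1.getD (x0 ^^^ b) 0 = (((e0+1:Nat)):Int) := by
                rw [hd1get _ hns, if_pos rfl]
              have h2 := hunch' (x0 ^^^ b) hns (by rw [h1]; push_cast; omega)
              rw [h2, h1]
              push_cast; omega
            · exact hnb' b hbtl
          · -- every queued element is a fresh state at level e0+1
            intro y hy
            rcases List.mem_cons.mp hy with hyeq | hytl
            · subst hyeq
              refine ⟨nsN, hns, rfl, ?_⟩
              have h1 : dist1.getD nsN 0 = (((e0+1:Nat)):Int) := by
                rw [hd1get _ hns, if_pos rfl]
              rw [hunch' nsN hns (by rw [h1]; push_cast; omega), h1]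
            · exact hnewv' y hytl
          · -- every newly visited state was queued
            intro x hxlt hold hnew
            by_cases hx : nsN = x
            · exact hx ▸ List.mem_cons_self
            · have h1 : dist1.getD x 0 = dist.getD x 0 := by rw [hd1get x hxlt, if_neg hx]
              exact List.mem_cons_of_mem _ (hchg' x hxlt (h1 ▸ hold) hnew)
          · -- counting: one fresh cell was consumed
            have hc := pv_count_set (((e0:Nat):Int) + 1) dist nsN (by omega) hfresh (by omega)
            rw [← hdist1] at hc
            simp only [List.length_cons]
            omega
    · -- neighbour already visited: nothing happens on this button
      have hresstep : res = pvBfsInner (mlN'.map (Nat.cast : Nat → Int)) ((t:Nat):Int) ((e0:Nat):Int) ((x0:Nat):Int)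
          (dist, acc, none) := by
        rw [hres, hstep, if_neg (by rw [hget]; exact hfresh)]
      rcases ih (fun b hb => hsub b (List.mem_cons_of_mem _ hb)) dist acc hlen hB hT hcomp res hresstep with hsome | ⟨hrnone, newl', hq', hlen', hB', hT', hunch', hnb', hnewv', hchg', hcnt'⟩
      · exact Or.inl hsome
      · right
        refine ⟨hrnone, newl', hq', hlen', hB', hT', hunch', ?_, hnewv', hchg', hcnt'⟩
        intro b hb
        rcases List.mem_cons.mp hb with hbeq | hbtl
        · subst hbeq
          rw [hunch' (x0 ^^^ b) (Nat.xor_lt_two_pow hx0 hbn) hfresh]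
          exact hfresh
        · exact hnb' b hbtl

-- the BFS loop returns exactly the minimal walk length to the target (none if unreachable)
theorem pvLoopBest (n : Nat) (msN : List Nat) (masks : List Int)
    (hm : masks = msN.map (Nat.cast : Nat → Int)) (hball : ∀ b ∈ msN, b < 2^n)
    (t : Nat) (htn : t < 2^n) :
    ∀ (fuel : Nat) (dist q : List Int),
    pvInv n msN t dist q →
    q.length + dist.count (-1) < fuel →
    pvIsBest (pvBfsLoop masks ((t:Nat):Int) fuel dist q)
      (fun k => ∃ e : Nat, pvRk msN e t ∧ (∀ e' < e, ¬ pvRk msN e' t) ∧ k = (e:Int)) := by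
  intro fuel
  induction fuel with
  | zero => intro dist q _ hmeas; exact absurd hmeas (by omega)
  | succ fuel ihf =>
    intro dist q hinv hmeas
    obtain ⟨hlen, hB, hV0, hT, ⟨d0, l1, l2, hq, h1, h2⟩, hC⟩ := hinv
    cases q with
    | nil =>
      have hall : ∀ e x, pvRk msN e x → dist.getD x 0 ≠ -1 := by
        intro e x h
        induction h with
        | zero => exact hV0
        | step e y b hy hbm ihy =>
          have hylt := pvRk_lt n msN hball _ _ hy
          rcases hC y hylt ihy with hin | hexp
          · exact absurd hin (List.not_mem_nil)
          · exact hexp b hbm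
      have hnone : pvBfsLoop masks ((t:Nat):Int) (fuel+1) dist [] = none := rfl
      rw [hnone]
      refine ⟨fun k hk => ?_, fun _ k hk => ?_⟩
      · exact nomatch hk
      · obtain ⟨e, hRk, _, _⟩ := hk
        exact (hall e t hRk) hT
    | cons state rest =>
      -- normalise the frontier split so that its head carries level d
      have hnorm : ∃ d : Nat, ∃ L1 L2 : List Int, state :: rest = L1 ++ L2 ∧
          (∀ y ∈ L1, ∃ x : Nat, x < 2^n ∧ y = (x:Int) ∧ dist.getD x 0 = (d:Int)) ∧
          (∀ y ∈ L2, ∃ x : Nat, x < 2^n ∧ y = (x:Int) ∧ dist.getD x 0 = ((d+1:Nat):Int)) ∧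
          L1 ≠ [] := by
        cases l1 with
        | nil =>
          refine ⟨d0 + 1, l2, [], by simpa using hq, h2, by simp, ?_⟩
          intro hc
          rw [hc] at hq
          exact absurd hq.symm (by simp)
        | cons a l1t => exact ⟨d0, a :: l1t, l2, hq, h1, h2, by simp⟩
      obtain ⟨d, L1, L2, hq', h1', h2', hL1⟩ := hnorm
      cases L1 with
      | nil => exact absurd rfl hL1
      | cons y L1t =>
        have hhead : y = state ∧ rest = L1t ++ L2 := by
          rw [List.cons_append] at hq'
          exact ⟨(List.cons.injEq _ _ _ _ ▸ hq').1.symm, (List.cons.injEq _ _ _ _ ▸ hq').2⟩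
        obtain ⟨hys, hrest⟩ := hhead
        subst hys
        obtain ⟨x0, hx0lt, hstate, hx0val⟩ := h1' y List.mem_cons_self
        subst hstate
        have hRk0 : pvRk msN d x0 := by
          rcases hB x0 hx0lt with hc | ⟨e, hval, hRke, _⟩
          · rw [hc] at hx0val; exact absurd hx0val (by omega)
          · have : e = d := by rw [hval] at hx0val; exact_mod_cast hx0val
            exact this ▸ hRke
        have hcomp : ∀ x : Nat, x < 2^n → dist.getD x 0 = -1 → ∀ e' ≤ d, ¬ pvRk msN e' x :=
          fun x hx hxval e' he' hRk => (pvInv_comp n msN hball dist _ d _ _ hq' h1' h2' hB hV0 hC e' he' x hRk) hxval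
        have hd_int : PySem.List.pyGetD dist ((x0:Nat):Int) (-1) = ((d:Nat):Int) := by
          rw [PySem.List.pyGetD_natCast, pv_getD_default dist x0 (by omega) (-1) 0, hx0val]
        have hres_eq : pvBfsInner masks ((t:Nat):Int) (PySem.List.pyGetD dist ((x0:Nat):Int) (-1)) ((x0:Nat):Int) (dist, [], none)
            = pvBfsInner (msN.map (Nat.cast : Nat → Int)) ((t:Nat):Int) ((d:Nat):Int) ((x0:Nat):Int) (dist, [], none) := by
          rw [hd_int, hm]
        have hloop : pvBfsLoop masks ((t:Nat):Int) (fuel+1) dist (((x0:Nat):Int) :: rest)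
            = (match (pvBfsInner (msN.map (Nat.cast : Nat → Int)) ((t:Nat):Int) ((d:Nat):Int) ((x0:Nat):Int) (dist, [], none)).2.2 with
               | some r => some r
               | none => pvBfsLoop masks ((t:Nat):Int) fuel
                   (pvBfsInner (msN.map (Nat.cast : Nat → Int)) ((t:Nat):Int) ((d:Nat):Int) ((x0:Nat):Int) (dist, [], none)).1
                   (rest ++ (pvBfsInner (msN.map (Nat.cast : Nat → Int)) ((t:Nat):Int) ((d:Nat):Int) ((x0:Nat):Int) (dist, [], none)).2.1)) := by
          show (match (pvBfsInner masks ((t:Nat):Int) (PySem.List.pyGetD dist ((x0:Nat):Int) (-1)) ((x0:Nat):Int) (dist, [], none)).2.2 with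
               | some r => some r
               | none => pvBfsLoop masks ((t:Nat):Int) fuel
                   (pvBfsInner masks ((t:Nat):Int) (PySem.List.pyGetD dist ((x0:Nat):Int) (-1)) ((x0:Nat):Int) (dist, [], none)).1
                   (rest ++ (pvBfsInner masks ((t:Nat):Int) (PySem.List.pyGetD dist ((x0:Nat):Int) (-1)) ((x0:Nat):Int) (dist, [], none)).2.1)) = _
          rw [hres_eq]
        rw [hloop]
        rcases pvInnerFold n msN hball t x0 d hx0lt hRk0 msN (fun _ hb => hb) dist []
            hlen hB hT hcomp _ rfl with ⟨hs, hRkt⟩ | ⟨hs, newl, hq2, hlen2, hB2, hT2, hunch2, hnb2, hnewv2, hchg2, hcnt2⟩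
        · -- early return: the target was found at level d+1, which is minimal
          rw [hs]
          refine ⟨fun k hk => ?_, fun h => nomatch h⟩
          have hkval : k = ((d:Nat):Int) + 1 := by
            injection hk with h; exact h.symm
          subst hkval
          refine ⟨⟨d+1, hRkt, fun e' he' => hcomp t htn hT e' (by omega), by push_cast; ring⟩, ?_⟩
          rintro k' ⟨e', hRk', _, hk'⟩
          have hde : d + 1 ≤ e' := by
            by_contra hlt
            exact hcomp t htn hT e' (by omega) hRk'
          subst hk'
          omega
        · -- no return: recurse with the enlarged frontier
          rw [hs]
          have hq2' : (pvBfsInner (msN.map (Nat.cast : Nat → Int)) ((t:Nat):Int) ((d:Nat):Int) ((x0:Nat):Int) (dist, [], none)).2.1 = newl := by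
            simpa using hq2
          rw [hq2']
          set RES := (pvBfsInner (msN.map (Nat.cast : Nat → Int)) ((t:Nat):Int) ((d:Nat):Int) ((x0:Nat):Int) (dist, [], none)).1 with hRES
          apply ihf
          · -- the invariant is preserved
            refine ⟨hlen2, hB2, ?_, hT2, ?_, ?_⟩
            · rw [hunch2 0 (by positivity) hV0]
              exact hV0
            · refine ⟨d, L1t, L2 ++ newl, by rw [hrest, List.append_assoc], ?_, ?_⟩
              · intro z hz
                obtain ⟨x, hxlt, hzx, hxv⟩ := h1' z (List.mem_cons_of_mem _ hz)
                exact ⟨x, hxlt, hzx, by rw [hunch2 x hxlt (by rw [hxv]; omega), hxv]⟩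
              · intro z hz
                rcases List.mem_append.mp hz with hz1 | hz2
                · obtain ⟨x, hxlt, hzx, hxv⟩ := h2' z hz1
                  exact ⟨x, hxlt, hzx, by rw [hunch2 x hxlt (by rw [hxv]; omega), hxv]⟩
                · exact hnewv2 z hz2
            · intro x hxlt hvis
              by_cases hold : dist.getD x 0 = -1
              · exact Or.inl (List.mem_append.mpr (Or.inr (hchg2 x hxlt hold hvis)))
              · rcases hC x hxlt hold with hin | hexp
                · rcases List.mem_cons.mp hin with hxs | hxr
                  · have hxx0 : x = x0 := by exact_mod_cast hxs
                    subst hxx0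
                    exact Or.inr (fun b hb => hnb2 b hb)
                  · exact Or.inl (List.mem_append.mpr (Or.inl hxr))
                · refine Or.inr (fun b hb => ?_)
                  have hb2 := hexp b hb
                  rw [hunch2 _ (Nat.xor_lt_two_pow hxlt (hball b hb)) hb2]
                  exact hb2
          · -- the measure strictly decreases
            have hml : (((x0:Nat):Int) :: rest).length = rest.length + 1 := by simp
            simp only [List.length_append]
            simp only [hml] at hmeas
            omega

-- A's BFS computes the minimal walk length to the target
theorem pvSolveByBfs_isBest (n : Nat) (msN : List Nat) (masks : List Int)
    (hm : masks = msN.map (Nat.cast : Nat → Int)) (hball : ∀ b ∈ msN, b < 2^n)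
    (t : Nat) (ht : t ≠ 0) (htn : t < 2^n) :
    pvIsBest (pvSolveByBfs ((t:Nat):Int) masks ((n:Nat):Int))
      (fun k => ∃ e : Nat, pvRk msN e t ∧ (∀ e' < e, ¬ pvRk msN e' t) ∧ k = (e:Int)) := by
  unfold pvSolveByBfs
  rw [if_neg (by exact_mod_cast ht)]
  have htid : (((n:Nat):Int)).toNat = n := by omega
  have hshift : (1:Int) <<< n = (((2^n : Nat)):Int) := by
    rw [Int.shiftLeft_eq]; push_cast; ring
  have hrepl : PySem.List.pyRepeat [(-1:Int)] ((1:Int) <<< n) = List.replicate (2^n) (-1:Int) := by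
    rw [hshift, PySem.List.pyRepeat_singleton, Int.toNat_natCast]
  have hzero : ((0:Nat):Int) = (0:Int) := rfl
  have hset : PySem.List.pySetD (List.replicate (2^n) (-1:Int)) 0 0
      = (List.replicate (2^n) (-1:Int)).set 0 0 := by
    rw [← hzero, PySem.List.pySetD_natCast]
  have hfuel : (((1:Int) <<< n)).toNat = 2^n := by rw [hshift, Int.toNat_natCast]
  dsimp only
  rw [htid, hrepl, hset, hfuel]
  set dist0 := (List.replicate (2^n) (-1:Int)).set 0 0 with hdist0
  have hNpos : 0 < 2^n := by positivity
  have hget0 : ∀ x : Nat, x < 2^n → dist0.getD x 0 = if x = 0 then 0 else -1 := by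
    intro x hx
    rw [hdist0, List.getD_eq_getElem?_getD, List.getElem?_set]
    by_cases hx0 : x = 0
    · rw [if_pos (by omega), if_pos (by rw [List.length_replicate]; omega), if_pos hx0]; rfl
    · rw [if_neg (by omega), List.getElem?_replicate, if_pos hx, if_neg hx0]; rfl
  apply pvLoopBest n msN masks hm hball t htn
  · refine ⟨by rw [hdist0, List.length_set, List.length_replicate], ?_, ?_, ?_, ?_, ?_⟩
    · intro x hx
      rw [hget0 x hx]
      by_cases hx0 : x = 0
      · subst hx0
        right
        exact ⟨0, by simp, pvRk.zero, fun e' he' => by omega⟩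
      · rw [if_neg hx0]
        exact Or.inl rfl
    · rw [hget0 0 hNpos, if_pos rfl]
      omega
    · rw [hget0 t htn, if_neg ht]
    · refine ⟨0, [((0:Nat):Int)], [], by simp, ?_, by simp⟩
      intro y hy
      rw [List.mem_singleton.mp hy]
      exact ⟨0, hNpos, rfl, by rw [hget0 0 hNpos]; simp⟩
    · intro x hx hvis
      left
      have hx0 : x = 0 := by
        by_contra hc
        rw [hget0 x hx, if_neg hc] at hvis
        exact hvis rfl
      subst hx0
      exact List.mem_singleton.mpr rfl
  · have hcnt : dist0.count (-1) + 1 = 2^n := by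
      have := pv_count_set 0 (List.replicate (2^n) (-1:Int)) 0
        (by rw [List.length_replicate]; omega)
        (by rw [List.getD_eq_getElem?_getD, List.getElem?_replicate, if_pos hNpos]; rfl)
        (by norm_num)
      rw [← hdist0] at this
      rw [this, List.count_replicate]
      norm_num
    simp only [List.length_singleton]
    omega

-- ---------- B computes the best left+right subset pair ----------

theorem pvHalfXor_aux (lst : List Int) : ∀ (sN : Nat) (a : Int),
    (List.range lst.length).foldl
      (fun x jN => if PySem.Int.band (((sN:Nat):Int) >>> ((((((jN:Nat)):Int)).toNat : Nat) : Int)) 1 ≠ 0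
                   then PySem.Int.bxor x (PySem.List.pyGetD lst (((jN:Nat)):Int) 0) else x) a
      = pvXorI lst sN a := by
  induction lst with
  | nil => intro sN a; simp [pvXorI]
  | cons b bs ih =>
    intro sN a
    rw [List.length_cons, List.range_succ_eq_map, List.foldl_cons]
    have hc0 : (if PySem.Int.band (((sN:Nat):Int) >>> ((((((0:Nat)):Int)).toNat : Nat) : Int)) 1 ≠ 0
        then PySem.Int.bxor a (PySem.List.pyGetD (b :: bs) (((0:Nat)):Int) 0) else a)
        = (if sN % 2 = 1 then PySem.Int.bxor a b else a) := by
      have h2 : (((sN:Nat)):Int) >>> ((((((0:Nat)):Int)).toNat : Nat) : Int) = (((sN:Nat)):Int) := by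
        rw [show (((((0:Nat)):Int)).toNat : Nat) = 0 from rfl, Int.shiftRight_natCast]
        simp
      rw [h2]
      have h3 : PySem.Int.band (((sN:Nat)):Int) 1 = (((sN % 2 : Nat)):Int) := by
        have h5 := PySem.Int.band_natCast sN 1
        rw [Nat.and_one_is_mod] at h5
        exact_mod_cast h5
      rw [h3]
      have h4 : PySem.List.pyGetD (b :: bs) (((0:Nat)):Int) 0 = b := by
        rw [PySem.List.pyGetD_natCast]; rfl
      rw [h4]
      rcases Nat.mod_two_eq_zero_or_one sN with hp | hp <;> simp [hp]
    rw [hc0, List.foldl_map]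
    have hfun : (fun (x : Int) (jN : Nat) =>
        (fun x jN => if PySem.Int.band (((sN:Nat):Int) >>> ((((((jN:Nat)):Int)).toNat : Nat) : Int)) 1 ≠ 0
          then PySem.Int.bxor x (PySem.List.pyGetD (b :: bs) (((jN:Nat)):Int) 0) else x) x jN.succ)
        = (fun (x : Int) (jN : Nat) =>
            if PySem.Int.band ((((sN/2 : Nat)):Int) >>> ((((((jN:Nat)):Int)).toNat : Nat) : Int)) 1 ≠ 0
            then PySem.Int.bxor x (PySem.List.pyGetD bs (((jN:Nat)):Int) 0) else x) := by
      funext x jN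
      show (if PySem.Int.band (((sN:Nat):Int) >>> ((((((jN.succ:Nat)):Int)).toNat : Nat) : Int)) 1 ≠ 0
          then PySem.Int.bxor x (PySem.List.pyGetD (b :: bs) (((jN.succ:Nat)):Int) 0) else x) = _
      have ht1 : ((((jN.succ:Nat)):Int)).toNat = jN + 1 := by omega
      have ht2 : ((((jN:Nat)):Int)).toNat = jN := by omega
      have hsh : (((sN:Nat)):Int) >>> (((jN + 1 : Nat)):Int) = (((sN/2 : Nat)):Int) >>> (((jN:Nat)):Int) := by
        rw [Int.shiftRight_natCast, Int.shiftRight_natCast]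
        norm_cast
        rw [Nat.shiftRight_eq_div_pow, Nat.shiftRight_eq_div_pow, Nat.pow_succ,
            Nat.mul_comm, ← Nat.div_div_eq_div_mul]
      have hg : PySem.List.pyGetD (b :: bs) (((jN.succ:Nat)):Int) 0 = PySem.List.pyGetD bs (((jN:Nat)):Int) 0 := by
        rw [PySem.List.pyGetD_natCast, PySem.List.pyGetD_natCast, List.getD_cons_succ]
      rw [ht1, ht2, hsh, hg]
    rw [hfun, ih (sN/2)]
    show pvXorI (b :: bs) sN a = _
    rfl

theorem pvHalfXor_eq (lst : List Int) (sN : Nat) :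
    pvHalfXor lst (lst.length : Int) ((sN:Nat) : Int) = pvXorI lst sN 0 := by
  unfold pvHalfXor
  rw [PySem.List.pyRange_zero_nat, List.foldl_map]
  have h := pvHalfXor_aux lst sN 0
  convert h using 2


theorem pvBestLeft_isBest (left : List Int) (x : Int) :
    pvIsBest ((pvBestLeft left (left.length : Int)).get? x)
      (fun c => ∃ s1, s1 < 2^left.length ∧ pvXorI left s1 0 = x ∧ c = ((pvPc s1 : Nat) : Int)) := by
  have key : ∀ u, ∀ x : Int,
      pvIsBest (((List.range u).foldl (fun d sN =>
          let xx := pvHalfXor left (left.length : Int) ((sN : Nat) : Int)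
          let c : Int := (PySem.Int.bitCount ((sN : Nat) : Int) : Int)
          match d.get? xx with
          | none => d.insert xx c
          | some prev => if c < prev then d.insert xx c else d) PySem.Dict.empty).get? x)
        (fun c => ∃ s1, s1 < u ∧ pvXorI left s1 0 = x ∧ c = ((pvPc s1 : Nat) : Int)) := by
    intro u
    induction u with
    | zero =>
      intro x
      refine ⟨fun k hk => ?_, fun _ k hk => ?_⟩
      · rw [List.range_zero, List.foldl_nil, PySem.Dict.get?_empty] at hk; cases hk
      · obtain ⟨s1, hs1, _⟩ := hk; omega
    | succ u ihu =>
      intro x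
      rw [List.range_succ, List.foldl_append, List.foldl_cons, List.foldl_nil]
      set D := (List.range u).foldl (fun d sN =>
          let xx := pvHalfXor left (left.length : Int) ((sN : Nat) : Int)
          let c : Int := (PySem.Int.bitCount ((sN : Nat) : Int) : Int)
          match d.get? xx with
          | none => d.insert xx c
          | some prev => if c < prev then d.insert xx c else d) PySem.Dict.empty with hD
      show pvIsBest ((match D.get? (pvHalfXor left (left.length : Int) ((u : Nat) : Int)) with
          | none => D.insert (pvHalfXor left (left.length : Int) ((u : Nat) : Int)) ((PySem.Int.bitCount ((u : Nat) : Int) : Nat) : Int)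
          | some prev => if ((PySem.Int.bitCount ((u : Nat) : Int) : Nat) : Int) < prev
              then D.insert (pvHalfXor left (left.length : Int) ((u : Nat) : Int)) ((PySem.Int.bitCount ((u : Nat) : Int) : Nat) : Int)
              else D).get? x) _
      set xu := pvHalfXor left (left.length : Int) ((u : Nat) : Int) with hxu
      set cu : Int := ((PySem.Int.bitCount ((u : Nat) : Int) : Nat) : Int) with hcu
      have hxuv : xu = pvXorI left u 0 := pvHalfXor_eq left u
      have hstep : (match D.get? xu with
          | none => D.insert xu cu
          | some prev => if cu < prev then D.insert xu cu else D).get? x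
          = if x = xu then pvOptUpd (D.get? xu) cu else D.get? x := by
        cases hdx : D.get? xu with
        | none =>
          show (D.insert xu cu).get? x = _
          rw [PySem.Dict.get?_insert]
          by_cases hx : x = xu
          · simp [hx, pvOptUpd]
          · simp [hx]
        | some prev =>
          show (if cu < prev then D.insert xu cu else D).get? x = _
          by_cases hcp : cu < prev
          · rw [if_pos hcp, PySem.Dict.get?_insert]
            by_cases hx : x = xu
            · simp [hx, pvOptUpd, hcp]
            · simp [hx]
          · rw [if_neg hcp]
            by_cases hx : x = xu
            · simp [hx, pvOptUpd, hdx, hcp]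
            · simp [hx]
      rw [hstep]
      by_cases hx : x = xu
      · rw [if_pos hx]
        have hupd := pvIsBest_upd (v := cu)
          (R := fun c => pvXorI left u 0 = x ∧ c = ((pvPc u : Nat) : Int)) (ihu xu)
          (⟨hxuv.symm.trans hx.symm, rfl⟩) (fun k hk => hk.2 ▸ le_of_eq rfl)
        subst hx
        refine pvIsBest_congr hupd (fun c => ?_)
        constructor
        · rintro (⟨s1, h1, h2, h3⟩ | ⟨h1, h2⟩)
          · exact ⟨s1, by omega, h2, h3⟩
          · exact ⟨u, by omega, h1, h2⟩
        · rintro ⟨s1, h1, h2, h3⟩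
          rcases Nat.lt_or_ge s1 u with hs | hs
          · exact Or.inl ⟨s1, hs, h2, h3⟩
          · have : s1 = u := by omega
            subst this
            exact Or.inr ⟨h2, h3⟩
      · rw [if_neg hx]
        have hnr : ∀ c : Int, ¬ (pvXorI left u 0 = x ∧ c = ((pvPc u : Nat) : Int)) := by
          intro c hc
          exact hx (by rw [← hc.1, hxuv])
        have hskip := pvIsBest_skip (R := fun c => pvXorI left u 0 = x ∧ c = ((pvPc u : Nat) : Int))
          (ihu x) hnr
        refine pvIsBest_congr hskip (fun c => ?_)
        constructor
        · rintro (⟨s1, h1, h2, h3⟩ | ⟨h1, h2⟩)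
          · exact ⟨s1, by omega, h2, h3⟩
          · exact absurd ⟨h1, h2⟩ (hnr c)
        · rintro ⟨s1, h1, h2, h3⟩
          rcases Nat.lt_or_ge s1 u with hs | hs
          · exact Or.inl ⟨s1, hs, h2, h3⟩
          · have : s1 = u := by omega
            subst this
            exact Or.inr ⟨h2, h3⟩
  unfold pvBestLeft
  rw [Int.toNat_natCast]
  rw [show (1:Int) <<< left.length = ((2^left.length : Nat) : Int) from by
    rw [Int.shiftLeft_eq]; push_cast; ring]
  rw [PySem.List.pyRange_zero_nat, List.foldl_map]
  have h := key (2^left.length) x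
  convert h using 3

theorem pvAlt_isBest (pattern : String) (masks : List Int)
    (hne : pvTargetA pattern ≠ 0) (hnm : masks ≠ []) :
    pvIsBest (min_presses_for_machine_alt pattern masks)
      (fun k => ∃ s2, s2 < 2^(masks.length - masks.length / 2) ∧ ∃ s1, s1 < 2^(masks.length / 2) ∧
        pvXorI (masks.take (masks.length / 2)) s1 0
          = PySem.Int.bxor (pvXorI (masks.drop (masks.length / 2)) s2 0) (pvTargetA pattern) ∧
        k = ((pvPc s2 : Nat) : Int) + ((pvPc s1 : Nat) : Int)) := by
  unfold min_presses_for_machine_alt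
  rw [if_neg (show ¬ pvTargetB pattern = 0 from hne), if_neg hnm]
  dsimp only
  set tgt := pvTargetB pattern with htgt
  have htb : tgt = pvTargetA pattern := rfl
  set L := masks.length with hL
  set hN := L / 2 with hhN
  have hmlen : PySem.List.len masks = (L : Int) := PySem.List.len_eq masks
  have hfd : PySem.Int.floordiv (L : Int) 2 = ((hN : Nat) : Int) := by
    have h0 := PySem.Int.floordiv_natCast L 2
    exact_mod_cast h0
  rw [hmlen, hfd, PySem.List.slice_to_natCast, PySem.List.slice_from_natCast]
  have hLl : (masks.take hN).length = hN := by
    rw [List.length_take]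
    exact Nat.min_eq_left (Nat.div_le_self L 2)
  have hRl : (masks.drop hN).length = L - hN := List.length_drop
  have hsubc : ((L : Int) - ((hN : Nat) : Int)) = (((L - hN : Nat)) : Int) := by
    have h1 : hN ≤ L := Nat.div_le_self L 2
    omega
  have hsubt : ((L : Int) - ((hN : Nat) : Int)).toNat = L - hN := by omega
  rw [hsubt]
  rw [show (1:Int) <<< (L - hN) = (((2^(L - hN) : Nat)) : Int) from by
    rw [Int.shiftLeft_eq]; push_cast; ring]
  rw [PySem.List.pyRange_zero_nat, List.foldl_map]
  simp only [hsubc]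
  simp only [show ((hN : Nat) : Int) = (((masks.take hN).length : Nat) : Int) from by rw [hLl],
    show (((L - hN : Nat)) : Int) = (((masks.drop hN).length : Nat) : Int) from by rw [hRl]]
  have key : ∀ u, pvIsBest ((List.range u).foldl (fun best sN =>
        let x := pvHalfXor (masks.drop hN) (((masks.drop hN).length : Nat) : Int) ((sN : Nat) : Int)
        let c : Int := (PySem.Int.bitCount ((sN : Nat) : Int) : Nat)
        match (pvBestLeft (masks.take hN) (((masks.take hN).length : Nat) : Int)).get? (PySem.Int.bxor x tgt) with
        | none => best
        | some half =>
          let tot := c + half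
          match best with
          | none => some tot
          | some b => if tot < b then some tot else some b) none)
      (fun k => ∃ s2, s2 < u ∧ ∃ s1, s1 < 2^(masks.take hN).length ∧
        pvXorI (masks.take hN) s1 0 = PySem.Int.bxor (pvXorI (masks.drop hN) s2 0) tgt ∧
        k = ((pvPc s2 : Nat) : Int) + ((pvPc s1 : Nat) : Int)) := by
    intro u
    induction u with
    | zero =>
      refine ⟨fun k hk => ?_, fun _ k hk => ?_⟩
      · rw [List.range_zero, List.foldl_nil] at hk; cases hk
      · obtain ⟨s2, hs2, _⟩ := hk; omega
    | succ u ihu =>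
      rw [List.range_succ, List.foldl_append, List.foldl_cons, List.foldl_nil]
      set B := (List.range u).foldl (fun best sN =>
        let x := pvHalfXor (masks.drop hN) (((masks.drop hN).length : Nat) : Int) ((sN : Nat) : Int)
        let c : Int := (PySem.Int.bitCount ((sN : Nat) : Int) : Nat)
        match (pvBestLeft (masks.take hN) (((masks.take hN).length : Nat) : Int)).get? (PySem.Int.bxor x tgt) with
        | none => best
        | some half =>
          let tot := c + half
          match best with
          | none => some tot
          | some b => if tot < b then some tot else some b) none with hB
      clear_value B
      clear hB
      dsimp only
      rw [pvHalfXor_eq (masks.drop hN) u]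
      have hlook := pvBestLeft_isBest (masks.take hN) (PySem.Int.bxor (pvXorI (masks.drop hN) u 0) tgt)
      cases hget : (pvBestLeft (masks.take hN) (((masks.take hN).length : Nat) : Int)).get?
          (PySem.Int.bxor (pvXorI (masks.drop hN) u 0) tgt) with
      | none =>
        have hempty := hlook.2 hget
        refine pvIsBest_congr (pvIsBest_skip (R := fun k => ∃ s1, s1 < 2^(masks.take hN).length ∧
            pvXorI (masks.take hN) s1 0 = PySem.Int.bxor (pvXorI (masks.drop hN) u 0) tgt ∧
            k = ((pvPc u : Nat) : Int) + ((pvPc s1 : Nat) : Int)) ihu ?_) (fun k => ?_)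
        · rintro k ⟨s1, h1, h2, h3⟩
          exact hempty ((pvPc s1 : Nat) : Int) ⟨s1, h1, h2, rfl⟩
        · constructor
          · rintro (⟨s2, h1, rest⟩ | ⟨s1, h1, h2, h3⟩)
            · exact ⟨s2, by omega, rest⟩
            · exact ⟨u, by omega, s1, h1, h2, h3⟩
          · rintro ⟨s2, h1, s1, h2, h3, h4⟩
            rcases Nat.lt_or_ge s2 u with hs | hs
            · exact Or.inl ⟨s2, hs, s1, h2, h3, h4⟩
            · have hs2u : s2 = u := by omega
              subst hs2u
              exact Or.inr ⟨s1, h2, h3, h4⟩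
      | some c1 =>
        dsimp only
        obtain ⟨⟨s1m, hs1m, hxm, hc1v⟩, hmin⟩ := hlook.1 c1 hget
        have hupd := pvIsBest_upd (v := ((PySem.Int.bitCount ((u : Nat) : Int) : Nat) : Int) + c1)
          (R := fun k => ∃ s1, s1 < 2^(masks.take hN).length ∧
            pvXorI (masks.take hN) s1 0 = PySem.Int.bxor (pvXorI (masks.drop hN) u 0) tgt ∧
            k = ((pvPc u : Nat) : Int) + ((pvPc s1 : Nat) : Int)) ihu
          ⟨s1m, hs1m, hxm, by rw [hc1v]; exact rfl⟩
          (by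
            rintro k ⟨s1, h1, h2, h3⟩
            have h5 := hmin ((pvPc s1 : Nat) : Int) ⟨s1, h1, h2, rfl⟩
            rw [h3]
            have hpcu : ((PySem.Int.bitCount ((u : Nat) : Int) : Nat) : Int) = ((pvPc u : Nat) : Int) := rfl
            omega)
        have hshape : ∀ (o : Option Int) (v : Int), (match o with
            | none => some v
            | some b => if v < b then some v else some b) = pvOptUpd o v := by
          intro o v; cases o <;> rfl
        rw [hshape B (((PySem.Int.bitCount ((u : Nat) : Int) : Nat) : Int) + c1)]
        refine pvIsBest_congr hupd (fun k => ?_)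
        constructor
        · rintro (⟨s2, h1, rest⟩ | ⟨s1, h1, h2, h3⟩)
          · exact ⟨s2, by omega, rest⟩
          · exact ⟨u, by omega, s1, h1, h2, h3⟩
        · rintro ⟨s2, h1, s1, h2, h3, h4⟩
          rcases Nat.lt_or_ge s2 u with hs | hs
          · exact Or.inl ⟨s2, hs, s1, h2, h3, h4⟩
          · have hs2u : s2 = u := by omega
            subst hs2u
            exact Or.inr ⟨s1, h2, h3, h4⟩
  have hfin := key (2^(L - hN))
  refine pvIsBest_congr (by convert hfin using 3) (fun k => ?_)
  rw [htb] at *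
  constructor
  · rintro ⟨s2, h1, s1, h2, h3, h4⟩
    exact ⟨s2, h1, s1, by rwa [hLl] at h2, h3, h4⟩
  · rintro ⟨s2, h1, s1, h2, h3, h4⟩
    exact ⟨s2, h1, s1, by rwa [← hLl] at h2, h3, h4⟩

theorem pv_xor_iff (aL aR t : Nat) : (aL = aR ^^^ t) ↔ (aL ^^^ aR = t) := by
  constructor
  · intro h
    rw [h, Nat.xor_comm aR t, Nat.xor_assoc, Nat.xor_self, Nat.xor_zero]
  · intro h
    rw [← h, Nat.xor_comm aL aR, ← Nat.xor_assoc, Nat.xor_self, Nat.zero_xor]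

theorem pvBridge (msN : List Nat) (t : Nat) (ht : t ≠ 0) (k : Int) :
    (∃ s2, s2 < 2^(msN.length - msN.length / 2) ∧ ∃ s1, s1 < 2^(msN.length / 2) ∧
      pvXorN (msN.take (msN.length / 2)) s1 ^^^ pvXorN (msN.drop (msN.length / 2)) s2 = t ∧
      k = ((pvPc s2 : Nat) : Int) + ((pvPc s1 : Nat) : Int))
    ↔ (∃ s, 0 < s ∧ s < 2^msN.length ∧ pvXorN msN s = t ∧ k = ((pvPc s : Nat) : Int)) := by
  set L := msN.length with hLd
  set hN := L / 2 with hNd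
  have hNL : hN ≤ L := Nat.div_le_self L 2
  have hTl : (msN.take hN).length = hN := by
    rw [List.length_take]; exact Nat.min_eq_left hNL
  have hA0 : (0:Nat) < 2^hN := by positivity
  have hB0 : (0:Nat) < 2^(L - hN) := by positivity
  have hAB : 2^hN * 2^(L - hN) = 2^L := by
    rw [← Nat.pow_add]
    congr 1
    omega
  have happ : ∀ s, pvXorN msN s = pvXorN (msN.take hN) (s % 2^hN) ^^^ pvXorN (msN.drop hN) (s / 2^hN) := by
    intro s
    conv_lhs => rw [← List.take_append_drop hN msN]
    rw [pvXorN_append, hTl]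
  constructor
  · rintro ⟨s2, hs2, s1, hs1, hxor, hk⟩
    refine ⟨s1 + 2^hN * s2, ?_, ?_, ?_, ?_⟩
    · rcases Nat.eq_zero_or_pos (s1 + 2^hN * s2) with hz | hp
      · exfalso
        have h1 : s1 = 0 := by omega
        have h2 : 2^hN * s2 = 0 := by omega
        have h3 : s2 = 0 := by
          rcases Nat.mul_eq_zero.mp h2 with hc | hc
          · omega
          · exact hc
        subst h1; subst h3
        rw [pvXorN_zero, pvXorN_zero] at hxor
        exact ht (by simpa using hxor.symm)
      · exact hp
    · calc s1 + 2^hN * s2 < 2^hN + 2^hN * s2 := by omega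
        _ = 2^hN * (s2 + 1) := by ring
        _ ≤ 2^hN * 2^(L - hN) := Nat.mul_le_mul_left _ (by omega)
        _ = 2^L := hAB
    · rw [happ]
      have hm1 : (s1 + 2^hN * s2) % 2^hN = s1 := by
        rw [Nat.add_mul_mod_self_left, Nat.mod_eq_of_lt hs1]
      have hm2 : (s1 + 2^hN * s2) / 2^hN = s2 := by
        rw [Nat.add_mul_div_left _ _ hA0, Nat.div_eq_of_lt hs1]
        omega
      rw [hm1, hm2, hxor]
    · rw [pvPc_split hN s2 s1 hs1, hk]
      push_cast
      ring
  · rintro ⟨s, hs0, hsL, hxor, hk⟩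
    refine ⟨s / 2^hN, ?_, s % 2^hN, Nat.mod_lt s hA0, ?_, ?_⟩
    · rw [Nat.div_lt_iff_lt_mul hA0]
      calc s < 2^L := hsL
        _ = 2^(L - hN) * 2^hN := by rw [← hAB]; ring
    · rw [← happ, hxor]
    · have hdecomp : s % 2^hN + 2^hN * (s / 2^hN) = s := Nat.mod_add_div s (2^hN)
      have h6 : pvPc s = pvPc (s % 2^hN) + pvPc (s / 2^hN) := by
        conv_lhs => rw [← hdecomp]
        exact pvPc_split hN (s / 2^hN) (s % 2^hN) (Nat.mod_lt s hA0)
      rw [hk, h6]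
      push_cast
      ring

-- ===== VERDICT (by name: the statement is the Claim_ definition above) =====
theorem min_presses_for_machine_spec : Claim_equal_min_presses_for_machine := by
  intro pattern masks hdom hpre
  unfold Spec_min_presses_for_machine
  have hAt : pvTargetA pattern = ((pvTNat pattern.toList 0 : Nat) : Int) := pvTargetA_eq pattern
  set tN := pvTNat pattern.toList 0 with htN
  by_cases ht0 : tN = 0
  · -- target 0: both sides answer 0
    have hA : min_presses_for_machine pattern masks = some 0 := by
      unfold min_presses_for_machine
      rw [hAt]
      rw [if_pos (by exact_mod_cast congrArg (Nat.cast : Nat → Int) ht0)]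
    have hB : min_presses_for_machine_alt pattern masks = some 0 := by
      unfold min_presses_for_machine_alt
      rw [if_pos (show pvTargetB pattern = 0 from by
        rw [show pvTargetB pattern = pvTargetA pattern from rfl, hAt, ht0]; norm_num)]
    rw [hA, hB]
  · have htne : ((tN : Nat) : Int) ≠ 0 := by exact_mod_cast ht0
    by_cases hme : masks = []
    · -- no buttons, target nonzero: both None
      subst hme
      have hA : min_presses_for_machine pattern [] = none := by
        unfold min_presses_for_machine
        rw [hAt, if_neg htne, if_pos rfl]
      have hB : min_presses_for_machine_alt pattern [] = none := by
        unfold min_presses_for_machine_alt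
        rw [if_neg (show ¬ pvTargetB pattern = 0 from by
          rw [show pvTargetB pattern = pvTargetA pattern from rfl, hAt]; exact htne), if_pos rfl]
      rw [hA, hB]
    · -- masks nonempty, target nonzero: Pre_ gives n-bit masks
      rcases hpre with hno | hempty | hrange
      · exact absurd ((pvTNat_zero_iff pattern.toList 0).mpr hno) ht0
      · exact absurd hempty hme
      set msN := masks.map Int.toNat with hmsN
      have hm : masks = msN.map (Nat.cast : Nat → Int) := by
        rw [hmsN, List.map_map]
        conv_lhs => rw [← List.map_id masks]
        exact List.map_congr_left (fun bm hbm => (Int.toNat_of_nonneg (hrange bm hbm).1).symm)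
      have hmlen : msN.length = masks.length := by rw [hmsN, List.length_map]
      have hpowc : ((2:Int))^pattern.toList.length = ((2^pattern.toList.length : Nat) : Int) := by
        push_cast; ring
      have hball : ∀ bN ∈ msN, bN < 2^pattern.toList.length := by
        intro bN hbN
        rw [hmsN] at hbN
        obtain ⟨bm, hbm, hbc⟩ := List.mem_map.mp hbN
        have hr := hrange bm hbm
        rw [hpowc] at hr
        omega
      have htn : tN < 2^pattern.toList.length := by
        have := pvTNat_lt pattern.toList 0
        rwa [Nat.add_zero] at this
      -- B's value characterised over Nat
      have hBbest := pvAlt_isBest pattern masks (by rw [hAt]; exact htne) hme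
      have hPB : ∀ k, (∃ s2, s2 < 2^(masks.length - masks.length / 2) ∧ ∃ s1, s1 < 2^(masks.length / 2) ∧
            pvXorI (masks.take (masks.length / 2)) s1 0
              = PySem.Int.bxor (pvXorI (masks.drop (masks.length / 2)) s2 0) (pvTargetA pattern) ∧
            k = ((pvPc s2 : Nat) : Int) + ((pvPc s1 : Nat) : Int))
          ↔ (∃ s, 0 < s ∧ s < 2^masks.length ∧ pvXorN msN s = tN ∧ k = ((pvPc s : Nat) : Int)) := by
        intro k
        have hTake : masks.take (masks.length / 2) = (msN.take (msN.length / 2)).map (Nat.cast : Nat → Int) := by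
          rw [hmlen, List.map_take, ← hm]
        have hDrop : masks.drop (masks.length / 2) = (msN.drop (msN.length / 2)).map (Nat.cast : Nat → Int) := by
          rw [hmlen, List.map_drop, ← hm]
        have hXI : ∀ (l : List Nat) s, pvXorI (l.map (Nat.cast : Nat → Int)) s 0 = ((pvXorN l s : Nat) : Int) := by
          intro l s
          have h0 := pvXorI_cast l s 0
          simpa using h0
        have hstep : ∀ s1 s2, (pvXorI (masks.take (masks.length / 2)) s1 0
              = PySem.Int.bxor (pvXorI (masks.drop (masks.length / 2)) s2 0) (pvTargetA pattern))
            ↔ (pvXorN (msN.take (msN.length / 2)) s1 ^^^ pvXorN (msN.drop (msN.length / 2)) s2 = tN) := by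
          intro s1 s2
          rw [hTake, hDrop, hXI, hXI, hAt, PySem.Int.bxor_natCast]
          rw [show (((pvXorN (msN.take (msN.length / 2)) s1 : Nat)) : Int)
              = (((pvXorN (msN.drop (msN.length / 2)) s2 ^^^ tN : Nat)) : Int)
              ↔ pvXorN (msN.take (msN.length / 2)) s1 = pvXorN (msN.drop (msN.length / 2)) s2 ^^^ tN
            from Nat.cast_inj]
          exact pv_xor_iff _ _ tN
        constructor
        · rintro ⟨s2, h1, s1, h2, h3, h4⟩
          obtain ⟨s, a1, a2, a3, a4⟩ := (pvBridge msN tN ht0 k).mp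
            ⟨s2, by rwa [hmlen], s1, by rwa [hmlen], (hstep s1 s2).mp h3, h4⟩
          exact ⟨s, a1, by rwa [hmlen] at a2, a3, a4⟩
        · rintro ⟨s, a1, a2, a3, a4⟩
          obtain ⟨s2, h1, s1, h2, h3, h4⟩ := (pvBridge msN tN ht0 k).mpr
            ⟨s, a1, by rwa [← hmlen] at a2, a3, a4⟩
          exact ⟨s2, by rwa [← hmlen], s1, by rwa [← hmlen], (hstep s1 s2).mpr h3, h4⟩
      have hBbest' := pvIsBest_congr hBbest hPB
      -- the two "minimal length" predicates are mutually cofinal below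
      have hPQ : ∀ k, (∃ e : Nat, pvRk msN e tN ∧ (∀ e' < e, ¬ pvRk msN e' tN) ∧ k = (e:Int)) →
          ∃ k', k' ≤ k ∧ ∃ s, 0 < s ∧ s < 2^masks.length ∧ pvXorN msN s = tN ∧ k' = ((pvPc s : Nat) : Int) := by
        rintro k ⟨e, hRk, _, rfl⟩
        obtain ⟨s, hsl, hxs, hpc⟩ := pvWalk_subset msN e tN hRk
        have hs0 : 0 < s := by
          rcases Nat.eq_zero_or_pos s with hz | hp
          · subst hz
            rw [pvXorN_zero] at hxs
            exact absurd hxs.symm ht0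
          · exact hp
        exact ⟨((pvPc s : Nat) : Int), by exact_mod_cast hpc,
          s, hs0, by rwa [hmlen] at hsl, hxs, rfl⟩
      have hQP : ∀ k, (∃ s, 0 < s ∧ s < 2^masks.length ∧ pvXorN msN s = tN ∧ k = ((pvPc s : Nat) : Int)) →
          ∃ k', k' ≤ k ∧ ∃ e : Nat, pvRk msN e tN ∧ (∀ e' < e, ¬ pvRk msN e' tN) ∧ k' = (e:Int) := by
        rintro k ⟨s, _, hsl, hxs, rfl⟩
        have hw := pvSubset_walk msN s (by rwa [← hmlen] at hsl)
        rw [hxs] at hw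
        obtain ⟨e, he, hemin⟩ := pv_exists_least (fun e => pvRk msN e tN) (pvPc s) hw
        have hle : e ≤ pvPc s := by
          by_contra hgt
          exact hemin (pvPc s) (by omega) hw
        exact ⟨(e:Int), by exact_mod_cast hle, e, he, hemin, rfl⟩
      have hbfs := pvSolveByBfs_isBest pattern.toList.length msN masks hm hball tN ht0 htn
      unfold min_presses_for_machine
      rw [hAt, if_neg htne, if_neg hme]
      by_cases hcond : (PySem.List.len masks ≤ 22 ∧ PySem.List.len masks ≤ PySem.Str.len pattern)
      · rw [if_pos hcond]
        have hsub := pvSolveBySubset_isBest masks msN hm tN ht0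
        cases hs : pvSolveBySubset ((tN : Nat) : Int) masks with
        | some a =>
          rw [hs] at hsub
          exact pvIsBest_unique hsub hBbest'
        | none =>
          show pvSolveByBfs ((tN : Nat) : Int) masks (PySem.Str.len pattern) = min_presses_for_machine_alt pattern masks
          rw [PySem.Str.len_eq]
          exact pvIsBest_unique_embed hbfs hBbest' hPQ hQP
      · rw [if_neg hcond]
        show pvSolveByBfs ((tN : Nat) : Int) masks (PySem.Str.len pattern) = min_presses_for_machine_alt pattern masks
        rw [PySem.Str.len_eq]
        exact pvIsBest_unique_embed hbfs hBbest' hPQ hQP
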